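-- pv_equiv track=rewrite | github.com/soohi0/Algorithm_study | 4월_2주/BOJ_벽부수고이동하기4/BOJ_벽부수고이동하기4_강태훈.py | solve
-- ===== SOURCE A (Python) =====
-- from collections import deque
--
-- dx = [-1,1,0,0]
--
-- dy = [0,0,1,-1]
--
-- def get_near(n, m, loc):
--     for i in range(4):
--         nx, ny = loc[0]+dx[i], loc[1]+dy[i]
--         if 0<=nx<m and 0<=ny<n:
--             yield nx, ny
--
-- def solve(n, m, board):
--     group_cnt = {}
--     group_idx = 0
--     grouped_board = [[0]*m for _ in range(n)]
--     for y in range(n):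
--         for x in range(m):
--             if board[y][x] == "1":
--                 continue
--             if grouped_board[y][x]>1:
--                 continue
--             group_idx += 1
--             local_group = set([(x,y)])
--             q = deque([(x,y)])
--             while q:
--                 cloc = q.popleft()
--                 for nloc in get_near(n, m, cloc):
--                     nx, ny = nloc
--                     if (nloc not in local_group) and (board[ny][nx]=="0"):
--                         local_group.add(nloc)
--                         q.append(nloc)
--             group_cnt[group_idx] = len(local_group)
--             for nx, ny in local_group:
--                 grouped_board[ny][nx] = group_idx
--
--     answer = []
--     for y in range(n):
--         line = ""
--         for x in range(m):
--             if board[y][x] == "0":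
--                 line += "0"
--             else:
--                 near_groups = set()
--                 for nx, ny in get_near(n,m,(x,y)):
--                     near_groups.add(grouped_board[ny][nx])
--                 sumval = 1
--                 for group_name in filter(lambda x:x, near_groups):
--                     sumval = (group_cnt[group_name]+sumval)%10
--                 line += str(sumval%10)
--         answer.append(line)
--     return answer
-- ===== SOURCE B (Python) =====
-- def solve(n, m, board):
--     # Single raster scan with union-by-relabel (merge-find), no BFS/queue:
--     # every open cell joins the class of its left/up open neighbours; when those
--     # belong to two classes, the classes are merged by rewriting labels.
--     comp = {}
--     for y in range(n):
--         for x in range(m):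
--             if board[y][x] != "0":
--                 continue
--             reps = []
--             for ax, ay in ((x - 1, y), (x, y - 1)):
--                 if 0 <= ax and 0 <= ay and board[ay][ax] == "0":
--                     r = comp[(ax, ay)]
--                     if r not in reps:
--                         reps.append(r)
--             if not reps:
--                 comp[(x, y)] = (x, y)
--             else:
--                 keep = reps[0]
--                 comp[(x, y)] = keep
--                 for r in reps[1:]:
--                     for cell, cr in comp.items():
--                         if cr == r:
--                             comp[cell] = keep
--     size = {}
--     for r in comp.values():
--         size[r] = size.get(r, 0) + 1
--     answer = []
--     for y in range(n):
--         row = []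
--         for x in range(m):
--             if board[y][x] == "0":
--                 row.append("0")
--             else:
--                 near = []
--                 for dx_, dy_ in ((-1, 0), (1, 0), (0, 1), (0, -1)):
--                     ax, ay = x + dx_, y + dy_
--                     if 0 <= ax < m and 0 <= ay < n and board[ay][ax] == "0":
--                         r = comp[(ax, ay)]
--                         if r not in near:
--                             near.append(r)
--                 row.append(str((1 + sum(size[r] for r in near)) % 10))
--         answer.append("".join(row))
--     return answer
-- ===== Notes on version B (the rewrite author's own statement) =====
-- stated objective: alternative
-- what changed: Replaces A's per-component deque-BFS flood fill (label grid + label->count dict, running mod over a label set) by a single raster scan with union-by-relabel (merge-find): each open cell joins the class of its left/up open neighbours, differing classes are merged by rewriting labels, and component sizes are obtained afterwards by counting labels; wall cells then dedupe neighbour labels and apply one closing mod to 1 + the sum of sizes.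
-- outside the precondition, e.g. on solve(2, 1, ['2', '1']): A returns ['1', '2'], B returns ['1', '1']; on solve(2, 2, ['00']): A raises IndexError, B raises IndexError
import Mathlib
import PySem

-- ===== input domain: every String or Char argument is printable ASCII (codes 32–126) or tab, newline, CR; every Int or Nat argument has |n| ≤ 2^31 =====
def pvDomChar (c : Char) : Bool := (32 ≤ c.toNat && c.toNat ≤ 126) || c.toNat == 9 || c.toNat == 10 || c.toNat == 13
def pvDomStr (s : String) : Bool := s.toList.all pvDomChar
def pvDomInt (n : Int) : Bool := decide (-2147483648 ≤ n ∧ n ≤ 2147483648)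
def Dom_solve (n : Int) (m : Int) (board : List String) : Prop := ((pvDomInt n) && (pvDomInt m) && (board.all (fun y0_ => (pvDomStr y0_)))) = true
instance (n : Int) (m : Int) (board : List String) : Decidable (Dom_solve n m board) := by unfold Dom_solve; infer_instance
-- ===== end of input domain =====

-- B replaces A's per-component deque-BFS flood fill by a single raster scan with
-- union-by-relabel (merge-find) plus a closing label count; an alternative of similar
-- size, not claimed faster.

-- ===== PORT A =====
-- board[y][x]; a total accessor (Pre_solve keeps every used index in range)
def pvCellA (board : List String) (y x : Int) : Char :=
  (PySem.List.pyGet? ((PySem.List.pyGet? board y).getD "").toList x).getD ' '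

-- get_near(n, m, loc): the in-bounds 4-neighbours, in dx/dy order
def pvNearA (n m : Int) (loc : Int × Int) : List (Int × Int) :=
  (List.zip [(-1 : Int), 1, 0, 0] [(0 : Int), 0, 1, -1]).foldl
    (fun acc d =>
      let nx := loc.1 + d.1
      let ny := loc.2 + d.2
      if 0 ≤ nx ∧ nx < m ∧ 0 ≤ ny ∧ ny < n then acc ++ [(nx, ny)] else acc) []

-- the `while q:` BFS loop; fuel only bounds the iteration count (provably sufficient)
def pvBfsA (n m : Int) (board : List String) :
    Nat → PySem.Set (Int × Int) → List (Int × Int) → PySem.Set (Int × Int)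
  | 0, lg, _ => lg
  | _+1, lg, [] => lg
  | fuel+1, lg, cloc :: q =>
    let st := (pvNearA n m cloc).foldl
      (fun (st : PySem.Set (Int × Int) × List (Int × Int)) nloc =>
        if ¬ PySem.Set.contains st.1 nloc ∧ pvCellA board nloc.2 nloc.1 = '0'
        then (PySem.Set.add st.1 nloc, st.2 ++ [nloc]) else st) (lg, q)
    pvBfsA n m board fuel st.1 st.2

-- the first (grouping) pass; grouped_board is kept as a map (x,y) ↦ label, absent = 0
def pvFirstA (n m : Int) (board : List String) :
    PySem.Dict Int Int × Int × PySem.Dict (Int × Int) Int :=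
  (PySem.List.pyRange 0 n 1).foldl (fun st y =>
    (PySem.List.pyRange 0 m 1).foldl (fun st x =>
      if pvCellA board y x = '1' then st
      else if 1 < st.2.2.getD (x, y) 0 then st
      else
        let gidx := st.2.1 + 1
        let lg := pvBfsA n m board (n.toNat * m.toNat + 1)
            (PySem.Set.ofList [(x, y)]) [(x, y)]
        let gc := st.1.insert gidx (lg.length : Int)
        let gb := lg.foldl (fun gb p => gb.insert p gidx) st.2.2
        (gc, gidx, gb)) st)
    (PySem.Dict.empty, 0, PySem.Dict.empty)

def solve (n : Int) (m : Int) (board : List String) : List String :=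
  let st := pvFirstA n m board
  (PySem.List.pyRange 0 n 1).foldl (fun answer y =>
    let line := (PySem.List.pyRange 0 m 1).foldl (fun line x =>
      if pvCellA board y x = '0' then line ++ ['0']
      else
        let ng : PySem.Set Int := (pvNearA n m (x, y)).foldl
          (fun s p => PySem.Set.add s (st.2.2.getD p 0)) PySem.Set.empty
        let sumval := (ng.filter (fun g => g != 0)).foldl
          (fun sv g => PySem.Int.mod (st.1.getD g 0 + sv) 10) 1
        line ++ (PySem.Int.toStr (PySem.Int.mod sumval 10)).toList) []
    answer ++ [String.ofList line]) []

-- ===== PORT B =====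
-- the inner `for cell, cr in comp.items(): if cr == r: comp[cell] = keep` loop
-- (values are only rewritten at existing keys, so folding over the items snapshot is exact)
def pvRelabelB (keep r : Int × Int) (d : PySem.Dict (Int × Int) (Int × Int)) :
    PySem.Dict (Int × Int) (Int × Int) :=
  d.items.foldl (fun d2 kv => if kv.2 == r then d2.insert kv.1 keep else d2) d

-- the `reps` list of distinct labels of the open left/up neighbours
def pvScanRepsB (board : List String) (d : PySem.Dict (Int × Int) (Int × Int))
    (x y : Int) : List (Int × Int) :=
  [(x - 1, y), (x, y - 1)].foldl (fun reps p =>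
    if 0 ≤ p.1 ∧ 0 ≤ p.2 ∧ pvCellA board p.2 p.1 = '0' then
      let r := d.getD p (0, 0)
      if reps.contains r then reps else reps ++ [r]
    else reps) []

-- the body of B's raster scan over one cell
def pvStepC (board : List String) (d : PySem.Dict (Int × Int) (Int × Int))
    (c : Int × Int) : PySem.Dict (Int × Int) (Int × Int) :=
  if pvCellA board c.2 c.1 ≠ '0' then d
  else
    match pvScanRepsB board d c.1 c.2 with
    | [] => d.insert c c
    | keep :: rest => rest.foldl (fun d r => pvRelabelB keep r d) (d.insert c keep)

-- B's first pass: comp maps every open cell to its class label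
def pvCompC (n m : Int) (board : List String) : PySem.Dict (Int × Int) (Int × Int) :=
  (PySem.List.pyRange 0 n 1).foldl (fun d y =>
    (PySem.List.pyRange 0 m 1).foldl (fun d x => pvStepC board d (x, y)) d)
    PySem.Dict.empty

-- `for r in comp.values(): size[r] = size.get(r, 0) + 1`
def pvSizeC (d : PySem.Dict (Int × Int) (Int × Int)) : PySem.Dict (Int × Int) Int :=
  d.values.foldl (fun s r => s.insert r (s.getD r 0 + 1)) PySem.Dict.empty

def solve_alt (n : Int) (m : Int) (board : List String) : List String :=
  let comp := pvCompC n m board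
  let size := pvSizeC comp
  (PySem.List.pyRange 0 n 1).foldl (fun answer y =>
    let row := (PySem.List.pyRange 0 m 1).foldl (fun row x =>
      if pvCellA board y x = '0' then row ++ ["0"]
      else
        let near := [((-1 : Int), (0 : Int)), (1, 0), (0, 1), (0, -1)].foldl
          (fun near dxy =>
            let ax := x + dxy.1
            let ay := y + dxy.2
            if 0 ≤ ax ∧ ax < m ∧ 0 ≤ ay ∧ ay < n ∧ pvCellA board ay ax = '0' then
              let r := comp.getD (ax, ay) (0, 0)
              if near.contains r then near else near ++ [r]
            else near) []
        row ++ [PySem.Int.toStr (PySem.Int.mod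
          (1 + (near.map (fun r => size.getD r 0)).sum) 10)]) []
    answer ++ [PySem.Str.join "" row]) []

-- ===== PRECONDITION & SPEC =====
-- Pre_solve excludes (a) boards with fewer than n rows or a scanned row shorter than m,
-- on which A raises IndexError, and (b) boards whose scanned region holds a character
-- other than '0'/'1' (outside the problem's 0/1-grid domain), where A still returns but
-- its value comes from the accident that its first pass seeds a flood group at any
-- non-'1' cell.
def Pre_solve (n : Int) (m : Int) (board : List String) : Prop :=
  (0 < n → n ≤ (board.length : Int)) ∧
  ((board.take n.toNat).all (fun row =>
    decide (m ≤ (row.toList.length : Int)) &&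
    (row.toList.take m.toNat).all (fun c => c == '0' || c == '1'))) = true
instance (n : Int) (m : Int) (board : List String) : Decidable (Pre_solve n m board) := by
  unfold Pre_solve; infer_instance

def pvWitness_solve : Int × Int × List String := (3, 3, ["011", "101", "110"])

def Spec_solve (n : Int) (m : Int) (board : List String) (out : List String) : Prop := out = solve_alt n m board
instance (n : Int) (m : Int) (board : List String) (out : List String) : Decidable (Spec_solve n m board out) := by unfold Spec_solve; infer_instance

-- ===== CLAIM (what is proved, stated in full; the proofs are below) =====
def Claim_equal_solve : Prop := ∀ (n : Int) (m : Int) (board : List String), Dom_solve n m board → Pre_solve n m board → Spec_solve n m board (solve n m board)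

-- ===== LEMMAS AND PROOFS =====

-- ---- basic notions ----
def POpen (n m : Int) (board : List String) (p : Int × Int) : Prop :=
  0 ≤ p.1 ∧ p.1 < m ∧ 0 ≤ p.2 ∧ p.2 < n ∧ pvCellA board p.2 p.1 = '0'

-- the open in-bounds 4-neighbours of a cell, in the common delta order
def pvOpenNbrsB (n m : Int) (board : List String) (x y : Int) : List (Int × Int) :=
  ([((-1 : Int), (0 : Int)), (1, 0), (0, 1), (0, -1)]).foldl
    (fun out d =>
      let ax := x + d.1
      let ay := y + d.2
      if 0 ≤ ax ∧ ax < m ∧ 0 ≤ ay ∧ ay < n ∧ pvCellA board ay ax = '0'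
      then out ++ [(ax, ay)] else out) []

def PAdj (n m : Int) (board : List String) (p q : Int × Int) : Prop :=
  POpen n m board p ∧ q ∈ pvOpenNbrsB n m board p.1 p.2

def PReach (n m : Int) (board : List String) : Int × Int → Int × Int → Prop :=
  Relation.ReflTransGen (PAdj n m board)

def pvCompA (n m : Int) (board : List String) (p : Int × Int) : List (Int × Int) :=
  pvBfsA n m board (n.toNat * m.toNat + 1) (PySem.Set.ofList [p]) [p]

-- Pre_solve gives the 0/1 dichotomy on every in-range cell
theorem pre_cell {n m : Int} {board : List String} (hpre : Pre_solve n m board)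
    {x y : Int} (hx0 : 0 ≤ x) (hxm : x < m) (hy0 : 0 ≤ y) (hyn : y < n) :
    pvCellA board y x = '0' ∨ pvCellA board y x = '1' := by
  obtain ⟨hlen, hall⟩ := hpre
  have hn : n ≤ (board.length : Int) := hlen (lt_of_le_of_lt hy0 hyn)
  have hylen : y.toNat < board.length := by omega
  have hrow : PySem.List.pyGet? board y = some board[y.toNat] :=
    PySem.List.pyGet?_eq_some_getElem board hy0 (by omega)
  set row := board[y.toNat] with hrowdef
  have hmem : row ∈ board.take n.toNat :=
    List.mem_take_iff_getElem.mpr ⟨y.toNat, by omega, rfl⟩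
  rw [List.all_eq_true] at hall
  have h2 := hall row hmem
  rw [Bool.and_eq_true, decide_eq_true_eq, List.all_eq_true] at h2
  obtain ⟨hrl, hchars⟩ := h2
  have hxlen : x.toNat < row.toList.length := by omega
  have hcell : pvCellA board y x = row.toList[x.toNat] := by
    unfold pvCellA
    rw [hrow]
    simp only [Option.getD_some]
    rw [PySem.List.pyGet?_eq_some_getElem row.toList hx0 (by omega)]
    rfl
  have hc := hchars (row.toList[x.toNat]) (by
    apply List.mem_take_iff_getElem.mpr
    exact ⟨x.toNat, by omega, by simp⟩)
  rw [Bool.or_eq_true, beq_iff_eq, beq_iff_eq] at hc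
  rw [hcell]; exact hc

-- ---- neighbour lists ----
theorem ite_append {α : Type} (c : Prop) [Decidable c] (acc l : List α) :
    (if c then acc ++ l else acc) = acc ++ (if c then l else []) := by
  split_ifs <;> simp

theorem mem_ite_singleton {α : Type} (c : Prop) [Decidable c] (a q : α) :
    q ∈ (if c then [a] else []) ↔ c ∧ q = a := by
  split_ifs with h <;> simp_all

theorem filter_ite_singleton {α : Type} (p : α → Bool) (c : Prop) [Decidable c] (a : α) :
    (if c then [a] else []).filter p = if c ∧ p a = true then [a] else [] := by
  split_ifs <;> simp_all

theorem nbrsB_explicit (n m : Int) (board : List String) (x y : Int) :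
    pvOpenNbrsB n m board x y =
      [] ++ (if 0 ≤ x + -1 ∧ x + -1 < m ∧ 0 ≤ y + 0 ∧ y + 0 < n ∧ pvCellA board (y + 0) (x + -1) = '0' then [(x + -1, y + 0)] else [])
        ++ (if 0 ≤ x + 1 ∧ x + 1 < m ∧ 0 ≤ y + 0 ∧ y + 0 < n ∧ pvCellA board (y + 0) (x + 1) = '0' then [(x + 1, y + 0)] else [])
        ++ (if 0 ≤ x + 0 ∧ x + 0 < m ∧ 0 ≤ y + 1 ∧ y + 1 < n ∧ pvCellA board (y + 1) (x + 0) = '0' then [(x + 0, y + 1)] else [])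
        ++ (if 0 ≤ x + 0 ∧ x + 0 < m ∧ 0 ≤ y + -1 ∧ y + -1 < n ∧ pvCellA board (y + -1) (x + 0) = '0' then [(x + 0, y + -1)] else []) := by
  simp only [pvOpenNbrsB, List.foldl]
  rw [ite_append, ite_append, ite_append, ite_append]

theorem nearA_explicit (n m : Int) (x y : Int) :
    pvNearA n m (x, y) =
      [] ++ (if 0 ≤ x + -1 ∧ x + -1 < m ∧ 0 ≤ y + 0 ∧ y + 0 < n then [(x + -1, y + 0)] else [])
        ++ (if 0 ≤ x + 1 ∧ x + 1 < m ∧ 0 ≤ y + 0 ∧ y + 0 < n then [(x + 1, y + 0)] else [])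
        ++ (if 0 ≤ x + 0 ∧ x + 0 < m ∧ 0 ≤ y + 1 ∧ y + 1 < n then [(x + 0, y + 1)] else [])
        ++ (if 0 ≤ x + 0 ∧ x + 0 < m ∧ 0 ≤ y + -1 ∧ y + -1 < n then [(x + 0, y + -1)] else []) := by
  simp only [pvNearA, List.zip, List.zipWith, List.foldl]
  rw [ite_append, ite_append, ite_append, ite_append]

theorem nbrsB_eq_filter (n m : Int) (board : List String) (x y : Int) :
    pvOpenNbrsB n m board x y
      = (pvNearA n m (x, y)).filter (fun q => pvCellA board q.2 q.1 == '0') := by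
  rw [nbrsB_explicit, nearA_explicit]
  simp only [List.filter_append, filter_ite_singleton, List.filter_nil]
  congr 1
  · congr 1
    · congr 1
      · congr 1
        all_goals
          apply if_congr _ rfl rfl
          dsimp
          simp [and_assoc, beq_iff_eq]
      · apply if_congr _ rfl rfl
        dsimp
        simp [and_assoc, beq_iff_eq]
    · apply if_congr _ rfl rfl
      dsimp
      simp [and_assoc, beq_iff_eq]
  · apply if_congr _ rfl rfl
    dsimp
    simp [and_assoc, beq_iff_eq]

theorem mem_nbrsB {n m : Int} {board : List String} {x y : Int} {q : Int × Int} :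
    q ∈ pvOpenNbrsB n m board x y ↔
      POpen n m board q ∧ (q = (x - 1, y) ∨ q = (x + 1, y) ∨ q = (x, y + 1) ∨ q = (x, y - 1)) := by
  rw [nbrsB_explicit]
  simp only [List.mem_append, mem_ite_singleton, List.not_mem_nil, false_or, or_assoc]
  constructor
  · rintro (⟨⟨a1,a2,a3,a4,a5⟩, rfl⟩ | ⟨⟨a1,a2,a3,a4,a5⟩, rfl⟩ | ⟨⟨a1,a2,a3,a4,a5⟩, rfl⟩ | ⟨⟨a1,a2,a3,a4,a5⟩, rfl⟩) <;>
      refine ⟨⟨by dsimp; omega, by dsimp; omega, by dsimp; omega, by dsimp; omega, by dsimp; exact a5⟩, ?_⟩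
    · exact Or.inl (by simp [Prod.ext_iff] <;> omega)
    · exact Or.inr (Or.inl (by simp [Prod.ext_iff] <;> omega))
    · exact Or.inr (Or.inr (Or.inl (by simp [Prod.ext_iff] <;> omega)))
    · exact Or.inr (Or.inr (Or.inr (by simp [Prod.ext_iff] <;> omega)))
  · rintro ⟨⟨h1, h2, h3, h4, h5⟩, (rfl | rfl | rfl | rfl)⟩ <;> dsimp at h1 h2 h3 h4 h5
    · refine Or.inl ⟨⟨by omega, by omega, by omega, by omega, ?_⟩, by simp [Prod.ext_iff] <;> omega⟩
      show pvCellA _ _ _ = '0'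
      convert h5 using 2 <;> omega
    · refine Or.inr (Or.inl ⟨⟨by omega, by omega, by omega, by omega, ?_⟩, by simp [Prod.ext_iff] <;> omega⟩)
      show pvCellA _ _ _ = '0'
      convert h5 using 2 <;> omega
    · refine Or.inr (Or.inr (Or.inl ⟨⟨by omega, by omega, by omega, by omega, ?_⟩, by simp [Prod.ext_iff] <;> omega⟩))
      show pvCellA _ _ _ = '0'
      convert h5 using 2 <;> omega
    · refine Or.inr (Or.inr (Or.inr ⟨⟨by omega, by omega, by omega, by omega, ?_⟩, by simp [Prod.ext_iff] <;> omega⟩))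
      show pvCellA _ _ _ = '0'
      convert h5 using 2 <;> omega

theorem open_of_mem_nbrsB {n m : Int} {board : List String} {x y : Int} {q : Int × Int}
    (h : q ∈ pvOpenNbrsB n m board x y) : POpen n m board q := (mem_nbrsB.mp h).1

theorem nbr_symm {n m : Int} {board : List String} {p q : Int × Int}
    (hp : POpen n m board p) (h : q ∈ pvOpenNbrsB n m board p.1 p.2) :
    p ∈ pvOpenNbrsB n m board q.1 q.2 := by
  obtain ⟨hq, hd⟩ := mem_nbrsB.mp h
  apply mem_nbrsB.mpr
  refine ⟨hp, ?_⟩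
  obtain ⟨p1, p2⟩ := p
  rcases hd with rfl | rfl | rfl | rfl <;> dsimp <;>
    [exact Or.inr (Or.inl (by simp [Prod.ext_iff] <;> omega));
     exact Or.inl (by simp [Prod.ext_iff] <;> omega);
     exact Or.inr (Or.inr (Or.inr (by simp [Prod.ext_iff] <;> omega)));
     exact Or.inr (Or.inr (Or.inl (by simp [Prod.ext_iff] <;> omega)))]

theorem adj_symm {n m : Int} {board : List String} : Symmetric (PAdj n m board) := by
  intro p q ⟨hp, hmem⟩
  exact ⟨open_of_mem_nbrsB hmem, nbr_symm hp hmem⟩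

theorem reach_symm {n m : Int} {board : List String} {p q : Int × Int}
    (h : PReach n m board p q) : PReach n m board q p :=
  Relation.ReflTransGen.symmetric adj_symm h

theorem reach_open {n m : Int} {board : List String} {s p : Int × Int}
    (hs : POpen n m board s) (h : PReach n m board s p) : POpen n m board p := by
  induction h with
  | refl => exact hs
  | tail _ hadj _ => exact open_of_mem_nbrsB hadj.2

theorem reach_trans {n m : Int} {board : List String} {p q r : Int × Int}
    (h1 : PReach n m board p q) (h2 : PReach n m board q r) : PReach n m board p r :=
  Relation.ReflTransGen.trans h1 h2

-- ---- saturation: A's BFS loop computes the reachable set ----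
theorem foldA_inner_eq (board : List String) (L : List (Int × Int)) :
    ∀ st : PySem.Set (Int × Int) × List (Int × Int),
    L.foldl (fun st nloc =>
        if ¬ PySem.Set.contains st.1 nloc ∧ pvCellA board nloc.2 nloc.1 = '0'
        then (PySem.Set.add st.1 nloc, st.2 ++ [nloc]) else st) st
      = (L.filter (fun q => pvCellA board q.2 q.1 == '0')).foldl
        (fun st nb => if PySem.Set.contains st.1 nb then st
          else (PySem.Set.add st.1 nb, st.2 ++ [nb])) st := by
  induction L with
  | nil => intro st; rfl
  | cons a L ih =>
    intro st
    rw [List.foldl_cons, List.filter_cons]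
    by_cases hc : pvCellA board a.2 a.1 = '0'
    · by_cases hm : PySem.Set.contains st.1 a = true
      · have hmemst : a ∈ st.1 := (PySem.Set.contains_iff _ _).mp hm
        rw [if_neg (show ¬(¬PySem.Set.contains st.1 a = true ∧ pvCellA board a.2 a.1 = '0') by simp [hmemst]),
            if_pos (show (pvCellA board a.2 a.1 == '0') = true by simpa using hc),
            List.foldl_cons, if_pos hm]
        exact ih st
      · rw [if_pos (show (¬PySem.Set.contains st.1 a = true ∧ pvCellA board a.2 a.1 = '0') from ⟨hm, hc⟩),
            if_pos (show (pvCellA board a.2 a.1 == '0') = true by simpa using hc),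
            List.foldl_cons, if_neg hm]
        exact ih _
    · rw [if_neg (show ¬(¬PySem.Set.contains st.1 a = true ∧ pvCellA board a.2 a.1 = '0') by simp [hc]),
          if_neg (show ¬(pvCellA board a.2 a.1 == '0') = true by simpa using hc)]
      exact ih st

theorem reach_mem_of_closed {n m : Int} {board : List String} {s : Int × Int}
    {S : List (Int × Int)} (hs : s ∈ S)
    (hcl : ∀ p ∈ S, ∀ q ∈ pvOpenNbrsB n m board p.1 p.2, q ∈ S) :
    ∀ p, PReach n m board s p → p ∈ S := by
  intro p h
  induction h with
  | refl => exact hs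
  | tail _ hadj ih => exact hcl _ ih _ hadj.2

theorem open_nodup_length_le (n m : Int) (board : List String) (S : List (Int × Int))
    (hnd : S.Nodup) (hop : ∀ p ∈ S, POpen n m board p) :
    S.length ≤ n.toNat * m.toNat := by
  classical
  have hinj : ∀ p ∈ S, ∀ q ∈ S, (p.1.toNat, p.2.toNat) = (q.1.toNat, q.2.toNat) → p = q := by
    intro p hp q hq h
    have h1 := (hop p hp).1; have h2 := (hop q hq).1
    have h3 := (hop p hp).2.2.1; have h4 := (hop q hq).2.2.1
    rw [Prod.ext_iff] at h ⊢
    dsimp at h; omega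
  have hnd2 : (S.map (fun p => (p.1.toNat, p.2.toNat))).Nodup := List.Nodup.map_on hinj hnd
  have hsub : (S.map (fun p => (p.1.toNat, p.2.toNat))).toFinset ⊆
      Finset.range m.toNat ×ˢ Finset.range n.toNat := by
    intro q hq
    simp only [List.mem_toFinset, List.mem_map] at hq
    obtain ⟨p, hp, rfl⟩ := hq
    have := hop p hp
    simp only [Finset.mem_product, Finset.mem_range]
    unfold POpen at this; omega
  calc S.length = (S.map (fun p => (p.1.toNat, p.2.toNat))).length := by simp
    _ = (S.map (fun p => (p.1.toNat, p.2.toNat))).toFinset.card := (List.toFinset_card_of_nodup hnd2).symm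
    _ ≤ (Finset.range m.toNat ×ˢ Finset.range n.toNat).card := Finset.card_le_card hsub
    _ = n.toNat * m.toNat := by simp [Finset.card_product, Nat.mul_comm]

theorem pvAddFold (L : List (Int × Int)) :
    ∀ (S W : List (Int × Int)), S.Nodup →
    ∃ new : List (Int × Int),
      L.foldl (fun st nb => if PySem.Set.contains st.1 nb then st
          else (PySem.Set.add st.1 nb, st.2 ++ [nb])) (S, W) = (S ++ new, W ++ new) ∧
      (∀ x ∈ new, x ∈ L ∧ x ∉ S) ∧ (∀ q ∈ L, q ∈ S ++ new) ∧ (S ++ new).Nodup := by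
  induction L with
  | nil => intro S W h; exact ⟨[], by simp, by simp, by simp, by simpa using h⟩
  | cons a L ih =>
    intro S W hnd
    rw [List.foldl_cons]
    by_cases hm : PySem.Set.contains S a = true
    · have hmem : a ∈ S := (PySem.Set.contains_iff S a).mp hm
      obtain ⟨new, heq, h1, h2, h3⟩ := ih S W hnd
      rw [if_pos (show PySem.Set.contains (S, W).1 a = true from hm)]
      refine ⟨new, heq, fun x hx => ⟨List.mem_cons_of_mem _ (h1 x hx).1, (h1 x hx).2⟩, ?_, h3⟩
      intro q hq
      rcases List.mem_cons.mp hq with rfl | hq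
      · exact List.mem_append.mpr (Or.inl hmem)
      · exact h2 q hq
    · have hmem : a ∉ S := fun h => hm ((PySem.Set.contains_iff S a).mpr h)
      rw [if_neg (show ¬ PySem.Set.contains (S, W).1 a = true from hm)]
      have hadd : PySem.Set.add (S, W).1 a = S ++ [a] := PySem.Set.add_of_not_mem hmem
      rw [hadd]
      have hnd' : (S ++ [a]).Nodup := by
        rw [List.nodup_append]
        refine ⟨hnd, List.nodup_singleton a, ?_⟩
        intro x hx y hy
        rw [List.mem_singleton] at hy
        subst hy
        intro h
        subst h
        exact hmem hx
      obtain ⟨new, heq, h1, h2, h3⟩ := ih (S ++ [a]) (W ++ [a]) hnd'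
      refine ⟨a :: new, ?_, ?_, ?_, ?_⟩
      · rw [heq]; simp [List.append_assoc]
      · intro x hx
        rcases List.mem_cons.mp hx with rfl | hx
        · exact ⟨List.mem_cons_self, hmem⟩
        · obtain ⟨hxl, hxs⟩ := h1 x hx
          exact ⟨List.mem_cons_of_mem _ hxl, fun hc => hxs (List.mem_append.mpr (Or.inl hc))⟩
      · intro q hq
        rcases List.mem_cons.mp hq with rfl | hq
        · simp
        · have := h2 q hq
          simpa [List.append_assoc] using this
      · simpa [List.append_assoc] using h3

def SatInv (n m : Int) (board : List String) (s : Int × Int)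
    (S W : List (Int × Int)) : Prop :=
  s ∈ S ∧ S.Nodup ∧ (∀ p ∈ W, p ∈ S) ∧ (∀ p ∈ S, POpen n m board p) ∧
  (∀ p ∈ S, PReach n m board s p) ∧
  (∀ p ∈ S, p ∈ W ∨ ∀ q ∈ pvOpenNbrsB n m board p.1 p.2, q ∈ S)

theorem bfsA_run (n m : Int) (board : List String) (s : Int × Int) :
    ∀ (fuel : Nat) (S W : List (Int × Int)), SatInv n m board s S W →
    W.length + (n.toNat * m.toNat - S.length) < fuel →
    (pvBfsA n m board fuel S W).Nodup ∧
    ∀ p, p ∈ pvBfsA n m board fuel S W ↔ PReach n m board s p := by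
  intro fuel
  induction fuel with
  | zero => intro S W _ h; omega
  | succ fuel ih =>
    intro S W hinv hfuel
    obtain ⟨hs, hnd, hWS, hop, hreach, hcl⟩ := hinv
    match W with
    | [] =>
      refine ⟨hnd, fun p => ⟨fun hp => hreach p hp, fun hp => ?_⟩⟩
      exact reach_mem_of_closed hs (fun p hp => (hcl p hp).resolve_left (by simp)) p hp
    | c :: W' =>
      have hstep : pvBfsA n m board (fuel + 1) S (c :: W')
          = pvBfsA n m board fuel
            ((pvOpenNbrsB n m board c.1 c.2).foldl
              (fun st nb => if PySem.Set.contains st.1 nb then st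
                else (PySem.Set.add st.1 nb, st.2 ++ [nb])) (S, W')).1
            ((pvOpenNbrsB n m board c.1 c.2).foldl
              (fun st nb => if PySem.Set.contains st.1 nb then st
                else (PySem.Set.add st.1 nb, st.2 ++ [nb])) (S, W')).2 := by
        show pvBfsA n m board fuel _ _ = _
        rw [foldA_inner_eq, nbrsB_eq_filter]
      obtain ⟨new, heq, h1, h2, h3⟩ := pvAddFold (pvOpenNbrsB n m board c.1 c.2) S W' hnd
      rw [hstep, heq]
      have hcS : c ∈ S := hWS c List.mem_cons_self
      have hopen' : ∀ p ∈ S ++ new, POpen n m board p := by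
        intro p hp
        rcases List.mem_append.mp hp with hp | hp
        · exact hop p hp
        · exact open_of_mem_nbrsB (h1 p hp).1
      have hlen : (S ++ new).length ≤ n.toNat * m.toNat :=
        open_nodup_length_le n m board _ h3 hopen'
      have hSnew : S.length + new.length = (S ++ new).length := by simp
      apply ih
      · refine ⟨List.mem_append.mpr (Or.inl hs), h3, ?_, hopen', ?_, ?_⟩
        · intro p hp
          rcases List.mem_append.mp hp with hp | hp
          · exact List.mem_append.mpr (Or.inl (hWS p (List.mem_cons_of_mem _ hp)))
          · exact List.mem_append.mpr (Or.inr hp)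
        · intro p hp
          rcases List.mem_append.mp hp with hp | hp
          · exact hreach p hp
          · exact (hreach c hcS).tail ⟨hop c hcS, (h1 p hp).1⟩
        · intro p hp
          rcases List.mem_append.mp hp with hpS | hpnew
          · rcases hcl p hpS with hpW | hpcl
            · rcases List.mem_cons.mp hpW with rfl | hpW'
              · exact Or.inr h2
              · exact Or.inl (List.mem_append.mpr (Or.inl hpW'))
            · exact Or.inr (fun q hq => List.mem_append.mpr (Or.inl (hpcl q hq)))
          · exact Or.inl (List.mem_append.mpr (Or.inr hpnew))
      · dsimp only
        simp only [List.length_append, List.length_cons] at hlen hfuel ⊢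
        omega

theorem compA_spec {n m : Int} {board : List String} {s : Int × Int}
    (hs : POpen n m board s) :
    (pvCompA n m board s).Nodup ∧
    ∀ p, p ∈ pvCompA n m board s ↔ PReach n m board s p := by
  have h1 : PySem.Set.ofList [s] = [s] := rfl
  apply bfsA_run n m board s (n.toNat * m.toNat + 1) [s] [s]
  · refine ⟨List.mem_singleton_self s, List.nodup_singleton s, ?_, ?_, ?_, ?_⟩
    · intro p hp; exact hp
    · intro p hp; rw [List.mem_singleton] at hp; subst hp; exact hs
    · intro p hp; rw [List.mem_singleton] at hp; subst hp; exact Relation.ReflTransGen.refl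
    · intro p hp; exact Or.inl hp
  · have h2 : POpen n m board s := hs
    unfold POpen at h2
    have h3 : 1 ≤ n.toNat * m.toNat := by
      have hn : 1 ≤ n.toNat := by omega
      have hm : 1 ≤ m.toNat := by omega
      calc 1 = 1 * 1 := by omega
        _ ≤ n.toNat * m.toNat := Nat.mul_le_mul hn hm
    have hl : ([s] : List (Int × Int)).length = 1 := rfl
    omega

theorem compA_mem_iff_of_reach {n m : Int} {board : List String} {p q : Int × Int}
    (hp : POpen n m board p) (hq : POpen n m board q) (h : PReach n m board p q) :
    ∀ r, r ∈ pvCompA n m board p ↔ r ∈ pvCompA n m board q := by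
  intro r
  rw [(compA_spec hp).2 r, (compA_spec hq).2 r]
  exact ⟨fun hr => reach_trans (reach_symm h) hr, fun hr => reach_trans h hr⟩

theorem compA_length_of_reach {n m : Int} {board : List String} {p q : Int × Int}
    (hp : POpen n m board p) (hq : POpen n m board q) (h : PReach n m board p q) :
    (pvCompA n m board p).length = (pvCompA n m board q).length := by
  apply List.Perm.length_eq
  rw [List.perm_ext_iff_of_nodup (compA_spec hp).1 (compA_spec hq).1]
  exact compA_mem_iff_of_reach hp hq h

-- ---- dictionary loops with a constant value ----
theorem getD_foldl_insert_const {ν : Type} (L : List (Int × Int)) (v : ν) :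
    ∀ (d : PySem.Dict (Int × Int) ν) (q : Int × Int) (dflt : ν),
    (L.foldl (fun d p => d.insert p v) d).getD q dflt
      = if q ∈ L then v else d.getD q dflt := by
  induction L with
  | nil => intro d q dflt; simp
  | cons a L ih =>
    intro d q dflt
    rw [List.foldl_cons, ih]
    by_cases hq : q ∈ L
    · rw [if_pos hq, if_pos (List.mem_cons_of_mem _ hq)]
    · rw [if_neg hq, PySem.Dict.getD_insert]
      by_cases hqa : q = a
      · rw [if_pos hqa, if_pos (by rw [hqa]; exact List.mem_cons_self)]
      · rw [if_neg hqa, if_neg (by simp [hqa, hq])]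

theorem contains_foldl_insert_const {ν : Type} (L : List (Int × Int)) (v : ν) :
    ∀ (d : PySem.Dict (Int × Int) ν) (q : Int × Int),
    (L.foldl (fun d p => d.insert p v) d).contains q = true ↔ q ∈ L ∨ d.contains q = true := by
  induction L with
  | nil => intro d q; simp
  | cons a L ih =>
    intro d q
    rw [List.foldl_cons, ih, PySem.Dict.contains_insert]
    by_cases hqa : q = a <;> simp [hqa]

-- ---- the scan order ----
def pvScanL (n m : Int) : List (Int × Int) :=
  (PySem.List.pyRange 0 n 1).flatMap (fun y => (PySem.List.pyRange 0 m 1).map (fun x => (x, y)))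

theorem mem_scanL {n m : Int} {c : Int × Int} :
    c ∈ pvScanL n m ↔ 0 ≤ c.1 ∧ c.1 < m ∧ 0 ≤ c.2 ∧ c.2 < n := by
  simp only [pvScanL, List.mem_flatMap, List.mem_map, PySem.List.mem_pyRange_one]
  constructor
  · rintro ⟨y, hy, x, hx, rfl⟩
    dsimp; omega
  · rintro ⟨h1, h2, h3, h4⟩
    exact ⟨c.2, ⟨h3, h4⟩, c.1, ⟨h1, h2⟩, rfl⟩

-- ---- pass 1 of A, characterised ----
def pvStepA (n m : Int) (board : List String)
    (st : PySem.Dict Int Int × Int × PySem.Dict (Int × Int) Int) (c : Int × Int) :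
    PySem.Dict Int Int × Int × PySem.Dict (Int × Int) Int :=
  if pvCellA board c.2 c.1 = '1' then st
  else if 1 < st.2.2.getD c 0 then st
  else
    let gidx := st.2.1 + 1
    let lg := pvBfsA n m board (n.toNat * m.toNat + 1) (PySem.Set.ofList [c]) [c]
    let gc := st.1.insert gidx (lg.length : Int)
    let gb := lg.foldl (fun gb p => gb.insert p gidx) st.2.2
    (gc, gidx, gb)

theorem firstA_eq (n m : Int) (board : List String) :
    pvFirstA n m board
      = (pvScanL n m).foldl (pvStepA n m board) (PySem.Dict.empty, 0, PySem.Dict.empty) := by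
  unfold pvFirstA pvScanL
  rw [List.foldl_flatMap]
  congr 1
  funext st y
  rw [List.foldl_map]
  rfl

def pvGbv (st : PySem.Dict Int Int × Int × PySem.Dict (Int × Int) Int) (p : Int × Int) : Int :=
  st.2.2.getD p 0

def InvA (n m : Int) (board : List String) (scanned : List (Int × Int))
    (st : PySem.Dict Int Int × Int × PySem.Dict (Int × Int) Int) : Prop :=
  0 ≤ st.2.1 ∧
  (∀ p, st.2.2.contains p = true → POpen n m board p) ∧
  (∀ p, POpen n m board p →
    (pvGbv st p ≠ 0 ↔ ∃ c ∈ scanned, POpen n m board c ∧ PReach n m board c p)) ∧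
  (∀ p q, POpen n m board p → POpen n m board q → PReach n m board p q →
    pvGbv st p = pvGbv st q) ∧
  (∀ p q, POpen n m board p → POpen n m board q → pvGbv st p ≠ 0 →
    pvGbv st p = pvGbv st q → PReach n m board p q) ∧
  (∀ p, POpen n m board p → 0 ≤ pvGbv st p ∧ pvGbv st p ≤ st.2.1) ∧
  (∀ p, POpen n m board p → pvGbv st p ≠ 0 →
    st.1.getD (pvGbv st p) 0 = ((pvCompA n m board p).length : Int))

theorem stepA_inv {n m : Int} {board : List String} (hpre : Pre_solve n m board)
    {scanned : List (Int × Int)} {st : PySem.Dict Int Int × Int × PySem.Dict (Int × Int) Int}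
    {c : Int × Int} (hc : 0 ≤ c.1 ∧ c.1 < m ∧ 0 ≤ c.2 ∧ c.2 < n)
    (hinv : InvA n m board scanned st) :
    InvA n m board (scanned ++ [c]) (pvStepA n m board st c) := by
  obtain ⟨h1, h2, h3, h4, h5, h6, h7⟩ := hinv
  unfold pvStepA
  by_cases hcell : pvCellA board c.2 c.1 = '1'
  · rw [if_pos hcell]
    have hnotopen : ¬ POpen n m board c := by
      intro hop
      rw [hop.2.2.2.2] at hcell
      exact absurd hcell (by decide)
    refine ⟨h1, h2, ?_, h4, h5, h6, h7⟩
    intro p hp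
    rw [h3 p hp]
    constructor
    · rintro ⟨c', hc', hx⟩
      exact ⟨c', List.mem_append.mpr (Or.inl hc'), hx⟩
    · rintro ⟨c', hc', hx⟩
      rcases List.mem_append.mp hc' with hc' | hc'
      · exact ⟨c', hc', hx⟩
      · rw [List.mem_singleton] at hc'
        subst hc'
        exact absurd hx.1 hnotopen
  · rw [if_neg hcell]
    have hcell0 : pvCellA board c.2 c.1 = '0' :=
      (pre_cell hpre hc.1 hc.2.1 hc.2.2.1 hc.2.2.2).resolve_right hcell
    have hopc : POpen n m board c := ⟨hc.1, hc.2.1, hc.2.2.1, hc.2.2.2, hcell0⟩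
    by_cases hskip : 1 < st.2.2.getD c 0
    · rw [if_pos hskip]
      have hgbvc : pvGbv st c ≠ 0 := by unfold pvGbv; omega
      refine ⟨h1, h2, ?_, h4, h5, h6, h7⟩
      intro p hp
      rw [h3 p hp]
      constructor
      · rintro ⟨c', hc', hx⟩
        exact ⟨c', List.mem_append.mpr (Or.inl hc'), hx⟩
      · rintro ⟨c', hc', hx⟩
        rcases List.mem_append.mp hc' with hc' | hc'
        · exact ⟨c', hc', hx⟩
        · rw [List.mem_singleton] at hc'
          rw [hc'] at hx
          rw [(h3 c hx.1)] at hgbvc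
          obtain ⟨c'', hc'', hx''⟩ := hgbvc
          exact ⟨c'', hc'', hx''.1, reach_trans hx''.2 hx.2⟩
    · rw [if_neg hskip]
      dsimp only
      rw [show pvBfsA n m board (n.toNat * m.toNat + 1) (PySem.Set.ofList [c]) [c]
            = pvCompA n m board c from rfl]
      have hS := compA_spec hopc
      set S := pvCompA n m board c with hSdef
      set g := st.2.1 with hgdef
      have hgb : ∀ p dflt, (S.foldl (fun gb p => gb.insert p (g + 1)) st.2.2).getD p dflt
          = if p ∈ S then g + 1 else st.2.2.getD p dflt := fun p dflt =>
        getD_foldl_insert_const S (g + 1) st.2.2 p dflt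
      have hgbv' : ∀ p, pvGbv ((st.1.insert (g+1) ((S.length : Int))), g+1,
          (S.foldl (fun gb p => gb.insert p (g + 1)) st.2.2)) p
          = if p ∈ S then g + 1 else pvGbv st p := by
        intro p
        unfold pvGbv
        dsimp only
        rw [hgb]
      have hmemS : ∀ p, p ∈ S ↔ PReach n m board c p := hS.2
      have hopS : ∀ p, p ∈ S → POpen n m board p := fun p hp => reach_open hopc ((hmemS p).mp hp)
      refine ⟨by dsimp only; omega, ?_, ?_, ?_, ?_, ?_, ?_⟩
      · intro p hp
        dsimp only at hp
        rcases (contains_foldl_insert_const S (g+1) st.2.2 p).mp hp with hp | hp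
        · exact hopS p hp
        · exact h2 p hp
      · intro p hp
        rw [hgbv' p]
        by_cases hpS : p ∈ S
        · rw [if_pos hpS]
          constructor
          · intro _
            exact ⟨c, List.mem_append.mpr (Or.inr List.mem_cons_self), hopc, (hmemS p).mp hpS⟩
          · intro _; omega
        · rw [if_neg hpS]
          rw [h3 p hp]
          constructor
          · rintro ⟨c', hc', hx⟩
            exact ⟨c', List.mem_append.mpr (Or.inl hc'), hx⟩
          · rintro ⟨c', hc', hx⟩
            rcases List.mem_append.mp hc' with hc' | hc'
            · exact ⟨c', hc', hx⟩
            · rw [List.mem_singleton] at hc'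
              subst hc'
              exact absurd ((hmemS p).mpr hx.2) hpS
      · intro p q hp hq hr
        rw [hgbv' p, hgbv' q]
        have : p ∈ S ↔ q ∈ S := by
          rw [hmemS p, hmemS q]
          exact ⟨fun h => reach_trans h hr, fun h => reach_trans h (reach_symm hr)⟩
        by_cases hpS : p ∈ S
        · rw [if_pos hpS, if_pos (this.mp hpS)]
        · rw [if_neg hpS, if_neg (fun hqS => hpS (this.mpr hqS))]
          exact h4 p q hp hq hr
      · intro p q hp hq hne heq
        rw [hgbv' p, hgbv' q] at *
        by_cases hpS : p ∈ S <;> by_cases hqS : q ∈ S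
        · exact reach_trans (reach_symm ((hmemS p).mp hpS)) ((hmemS q).mp hqS)
        · rw [if_pos hpS] at heq; rw [if_neg hqS] at heq
          have := (h6 q hq).2
          omega
        · rw [if_neg hpS] at heq; rw [if_pos hqS] at heq
          have := (h6 p hp).2
          rw [if_neg hpS] at hne
          omega
        · rw [if_neg hpS] at heq hne; rw [if_neg hqS] at heq
          exact h5 p q hp hq hne heq
      · intro p hp
        rw [hgbv' p]
        dsimp only
        by_cases hpS : p ∈ S
        · rw [if_pos hpS]; omega
        · rw [if_neg hpS]
          have := h6 p hp
          omega
      · intro p hp hne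
        rw [hgbv' p] at *
        dsimp only
        by_cases hpS : p ∈ S
        · rw [if_pos hpS]
          rw [PySem.Dict.getD_insert_self]
          have := compA_length_of_reach hopc (hopS p hpS) ((hmemS p).mp hpS)
          rw [hSdef, this]
        · rw [if_neg hpS] at hne ⊢
          have hle := (h6 p hp).2
          rw [PySem.Dict.getD_insert_of_ne]
          · exact h7 p hp hne
          · omega

theorem foldA_inv {n m : Int} {board : List String} (hpre : Pre_solve n m board) :
    ∀ (L : List (Int × Int)) (scanned : List (Int × Int))
      (st : PySem.Dict Int Int × Int × PySem.Dict (Int × Int) Int),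
    (∀ c ∈ L, 0 ≤ c.1 ∧ c.1 < m ∧ 0 ≤ c.2 ∧ c.2 < n) →
    InvA n m board scanned st →
    InvA n m board (scanned ++ L) (L.foldl (pvStepA n m board) st) := by
  intro L
  induction L with
  | nil => intro scanned st _ h; simpa using h
  | cons c L ih =>
    intro scanned st hb h
    rw [List.foldl_cons]
    have h2 := stepA_inv hpre (hb c List.mem_cons_self) h
    have h3 := ih (scanned ++ [c]) (pvStepA n m board st c)
      (fun c' hc' => hb c' (List.mem_cons_of_mem _ hc')) h2
    simpa [List.append_assoc] using h3

theorem firstA_final {n m : Int} {board : List String} (hpre : Pre_solve n m board) :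
    InvA n m board (pvScanL n m) (pvFirstA n m board) := by
  rw [firstA_eq]
  have h := foldA_inv hpre (pvScanL n m) [] (PySem.Dict.empty, 0, PySem.Dict.empty)
    (fun c hc => mem_scanL.mp hc) ?_
  · simpa using h
  · refine ⟨le_refl 0, ?_, ?_, ?_, ?_, ?_, ?_⟩
    · intro p hp; simp [PySem.Dict.contains_empty] at hp
    · intro p hp
      unfold pvGbv
      simp [PySem.Dict.getD_empty]
    · intro p q _ _ _; rfl
    · intro p q hp hq hne heq
      unfold pvGbv at hne
      simp [PySem.Dict.getD_empty] at hne
    · intro p hp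
      unfold pvGbv
      simp [PySem.Dict.getD_empty]
    · intro p hp hne
      unfold pvGbv at hne
      simp [PySem.Dict.getD_empty] at hne

-- final facts about A's first pass
def pvGbF (n m : Int) (board : List String) (p : Int × Int) : Int :=
  (pvFirstA n m board).2.2.getD p 0

def pvGcF (n m : Int) (board : List String) (g : Int) : Int :=
  (pvFirstA n m board).1.getD g 0

theorem gbF_ne_zero {n m : Int} {board : List String} (hpre : Pre_solve n m board)
    {p : Int × Int} (hp : POpen n m board p) : pvGbF n m board p ≠ 0 := by
  have h := (firstA_final hpre).2.2.1 p hp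
  exact h.mpr ⟨p, mem_scanL.mpr ⟨hp.1, hp.2.1, hp.2.2.1, hp.2.2.2.1⟩, hp,
    Relation.ReflTransGen.refl⟩

theorem gbF_eq_iff {n m : Int} {board : List String} (hpre : Pre_solve n m board)
    {p q : Int × Int} (hp : POpen n m board p) (hq : POpen n m board q) :
    pvGbF n m board p = pvGbF n m board q ↔ PReach n m board p q := by
  constructor
  · intro h
    exact (firstA_final hpre).2.2.2.2.1 p q hp hq (gbF_ne_zero hpre hp) h
  · intro h
    exact (firstA_final hpre).2.2.2.1 p q hp hq h

theorem gcF_gbF {n m : Int} {board : List String} (hpre : Pre_solve n m board)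
    {p : Int × Int} (hp : POpen n m board p) :
    pvGcF n m board (pvGbF n m board p) = ((pvCompA n m board p).length : Int) :=
  (firstA_final hpre).2.2.2.2.2.2 p hp (gbF_ne_zero hpre hp)

theorem gbF_zero_of_not_open {n m : Int} {board : List String} (hpre : Pre_solve n m board)
    {p : Int × Int} (hp : ¬ POpen n m board p) : pvGbF n m board p = 0 := by
  have h2 := (firstA_final hpre).2.1
  by_cases hcont : (pvFirstA n m board).2.2.contains p = true
  · exact absurd (h2 p hcont) hp
  · unfold pvGbF
    apply PySem.Dict.getD_of_not_contains
    simpa using hcont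

-- ---- raster order: pvScanL is lexicographically sorted in (y, x) ----
def pvLexYX (p q : Int × Int) : Prop := p.2 < q.2 ∨ (p.2 = q.2 ∧ p.1 < q.1)

theorem pyRange_pairwise_lt (a b : Int) : (PySem.List.pyRange a b 1).Pairwise (· < ·) := by
  by_cases h : a < b
  · rw [PySem.List.pyRange_one_cons h]
    refine List.Pairwise.cons ?_ (pyRange_pairwise_lt (a + 1) b)
    intro y hy
    have := PySem.List.mem_pyRange_one.mp hy
    omega
  · have hnil : PySem.List.pyRange a b 1 = [] := by
      apply List.eq_nil_iff_forall_not_mem.mpr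
      intro x hx
      have := PySem.List.mem_pyRange_one.mp hx
      omega
    rw [hnil]
    exact List.Pairwise.nil
termination_by (b - a).toNat
decreasing_by omega

theorem scanL_pairwise (n m : Int) : (pvScanL n m).Pairwise pvLexYX := by
  unfold pvScanL
  rw [List.flatMap_def]
  apply List.pairwise_flatten.mpr
  constructor
  · intro l' hl'
    obtain ⟨y, _, rfl⟩ := List.mem_map.mp hl'
    rw [List.pairwise_map]
    exact (pyRange_pairwise_lt 0 m).imp (fun h => Or.inr ⟨rfl, h⟩)
  · rw [List.pairwise_map]
    refine (pyRange_pairwise_lt 0 n).imp ?_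
    intro y y' hyy' p hp q hq
    obtain ⟨x, _, rfl⟩ := List.mem_map.mp hp
    obtain ⟨x', _, rfl⟩ := List.mem_map.mp hq
    exact Or.inl hyy'

theorem lexyx_irrefl (p : Int × Int) : ¬ pvLexYX p p := by
  unfold pvLexYX; omega

theorem lexyx_asymm {p q : Int × Int} (h : pvLexYX p q) : ¬ pvLexYX q p := by
  unfold pvLexYX at *; omega

theorem mem_split_scanL {n m : Int} {s t : List (Int × Int)} {c : Int × Int}
    (h : pvScanL n m = s ++ c :: t) :
    ∀ p, p ∈ s ↔ (p ∈ pvScanL n m ∧ pvLexYX p c) := by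
  have hpw := scanL_pairwise n m
  rw [h] at hpw
  rw [List.pairwise_append] at hpw
  obtain ⟨hpws, hpwct, hcross⟩ := hpw
  rw [List.pairwise_cons] at hpwct
  intro p
  constructor
  · intro hp
    exact ⟨by rw [h]; exact List.mem_append.mpr (Or.inl hp),
      hcross p hp c List.mem_cons_self⟩
  · rintro ⟨hmem, hlex⟩
    rw [h] at hmem
    rcases List.mem_append.mp hmem with hmem | hmem
    · exact hmem
    · rcases List.mem_cons.mp hmem with rfl | hmem
      · exact absurd hlex (lexyx_irrefl _)
      · exact absurd hlex (lexyx_asymm (hpwct.1 p hmem))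

-- ---- the relabelling loop, characterised ----
theorem contains_get?_getD {κ ν : Type} [BEq κ] [LawfulBEq κ] (d : PySem.Dict κ ν)
    (p : κ) (dflt : ν) (h : d.contains p = true) : d.get? p = some (d.getD p dflt) := by
  rw [PySem.Dict.contains_eq_isSome_get?] at h
  obtain ⟨v, hv⟩ := Option.isSome_iff_exists.mp h
  rw [hv, PySem.Dict.getD_eq_get?_getD, hv]
  rfl

theorem relabelAux (keep r : Int × Int) :
    ∀ (l : List ((Int × Int) × (Int × Int))) (d2 : PySem.Dict (Int × Int) (Int × Int)),
    (l.map Prod.fst).Nodup → (∀ kv ∈ l, d2.contains kv.1 = true) →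
    ((l.foldl (fun d2 kv => if kv.2 == r then d2.insert kv.1 keep else d2) d2).keys = d2.keys) ∧
    (∀ q, (l.foldl (fun d2 kv => if kv.2 == r then d2.insert kv.1 keep else d2) d2).get? q
        = if (q, r) ∈ l then some keep else d2.get? q) := by
  intro l
  induction l with
  | nil => intro d2 _ _; exact ⟨rfl, fun q => by simp⟩
  | cons kv l ih =>
    intro d2 hnd hcont
    rw [List.map_cons, List.nodup_cons] at hnd
    obtain ⟨hkv1, hnd'⟩ := hnd
    rw [List.foldl_cons]
    by_cases hr : kv.2 = r
    · rw [if_pos (by simpa using hr)]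
      have hckv : d2.contains kv.1 = true := hcont kv List.mem_cons_self
      have hcont' : ∀ p ∈ l, (d2.insert kv.1 keep).contains p.1 = true := by
        intro p hp
        rw [PySem.Dict.contains_insert]
        simp [hcont p (List.mem_cons_of_mem _ hp)]
      obtain ⟨ihk, ihg⟩ := ih (d2.insert kv.1 keep) hnd' hcont'
      refine ⟨by rw [ihk, PySem.Dict.keys_insert_of_contains d2 keep hckv], ?_⟩
      intro q
      rw [ihg q, PySem.Dict.get?_insert]
      by_cases hq : q = kv.1
      · have hql : (q, r) ∉ l := fun hc => hkv1 (List.mem_map.mpr ⟨(q, r), hc, hq⟩)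
        have hkvqr : kv = (q, r) := by
          rw [Prod.ext_iff]; exact ⟨hq.symm, hr⟩
        have hqc : (q, r) ∈ kv :: l := by
          rw [← hkvqr]; exact List.mem_cons_self
        rw [if_neg hql, if_pos hq, if_pos hqc]
      · have hiff : ((q, r) ∈ kv :: l) ↔ ((q, r) ∈ l) := by
          constructor
          · intro hc
            rcases List.mem_cons.mp hc with hc | hc
            · exact absurd (congrArg Prod.fst hc) hq
            · exact hc
          · exact List.mem_cons_of_mem _
        rw [if_congr hiff rfl rfl, if_neg hq]
    · rw [if_neg (by simpa using hr)]
      obtain ⟨ihk, ihg⟩ := ih d2 hnd' (fun p hp => hcont p (List.mem_cons_of_mem _ hp))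
      refine ⟨ihk, fun q => ?_⟩
      rw [ihg q]
      have hiff : ((q, r) ∈ kv :: l) ↔ ((q, r) ∈ l) := by
        constructor
        · intro hc
          rcases List.mem_cons.mp hc with hc | hc
          · exact absurd (congrArg Prod.snd hc).symm hr
          · exact hc
        · exact List.mem_cons_of_mem _
      rw [if_congr hiff rfl rfl]

theorem relabel_keys (keep r : Int × Int) (d : PySem.Dict (Int × Int) (Int × Int))
    (hnd : d.keys.Nodup) : (pvRelabelB keep r d).keys = d.keys :=
  (relabelAux keep r d.items d hnd
    (fun kv hkv => (PySem.Dict.contains_iff_mem_keys d kv.1).mpr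
      (PySem.Dict.mem_keys_of_mem_items d hkv))).1

theorem relabel_get? (keep r : Int × Int) (d : PySem.Dict (Int × Int) (Int × Int))
    (hnd : d.keys.Nodup) (q : Int × Int) :
    (pvRelabelB keep r d).get? q = if d.get? q = some r then some keep else d.get? q := by
  have h := (relabelAux keep r d.items d hnd
    (fun kv hkv => (PySem.Dict.contains_iff_mem_keys d kv.1).mpr
      (PySem.Dict.mem_keys_of_mem_items d hkv))).2 q
  unfold pvRelabelB
  rw [h, if_congr (PySem.Dict.get?_eq_some_iff_mem_items d q r hnd).symm rfl rfl]

theorem relabelFold (keep : Int × Int) :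
    ∀ (rs : List (Int × Int)) (d : PySem.Dict (Int × Int) (Int × Int)),
    d.keys.Nodup → keep ∉ rs →
    ((rs.foldl (fun d r => pvRelabelB keep r d) d).keys = d.keys) ∧
    (∀ q v, d.get? q = some v →
      (rs.foldl (fun d r => pvRelabelB keep r d) d).get? q
        = some (if v ∈ rs then keep else v)) := by
  intro rs
  induction rs with
  | nil => exact fun d _ _ => ⟨rfl, fun q v h => by simpa using h⟩
  | cons r rs ih =>
    intro d hnd hkeep
    rw [List.foldl_cons]
    have hknd : (pvRelabelB keep r d).keys.Nodup := by rw [relabel_keys keep r d hnd]; exact hnd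
    have hkeep' : keep ∉ rs := fun hc => hkeep (List.mem_cons_of_mem _ hc)
    obtain ⟨ihk, ihg⟩ := ih (pvRelabelB keep r d) hknd hkeep'
    refine ⟨by rw [ihk, relabel_keys keep r d hnd], ?_⟩
    intro q v hv
    by_cases hvr : v = r
    · have h1 : (pvRelabelB keep r d).get? q = some keep := by
        rw [relabel_get? keep r d hnd q, if_pos (by rw [hv, hvr])]
      rw [ihg q keep h1,
        if_neg (show keep ∉ rs from hkeep'),
        if_pos (show v ∈ r :: rs by rw [hvr]; exact List.mem_cons_self)]
    · have h1 : (pvRelabelB keep r d).get? q = some v := by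
        rw [relabel_get? keep r d hnd q,
          if_neg (fun hc => hvr (by injection (hv.symm.trans hc)))]
        exact hv
      rw [ihg q v h1]
      congr 1
      by_cases hvs : v ∈ rs
      · rw [if_pos hvs, if_pos (List.mem_cons_of_mem _ hvs)]
      · rw [if_neg hvs, if_neg (by simp [hvr, hvs])]

-- ---- a conditional fold is a fold over the filtered list ----
theorem foldl_cond_filter {α β : Type} (P : α → Prop) [DecidablePred P] (f : β → α → β) :
    ∀ (L : List α) (acc : β),
    L.foldl (fun acc a => if P a then f acc a else acc) acc
      = (L.filter (fun a => decide (P a))).foldl f acc := by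
  intro L
  induction L with
  | nil => intro acc; rfl
  | cons a L ih =>
    intro acc
    rw [List.foldl_cons, List.filter_cons]
    by_cases h : P a
    · rw [if_pos h, if_pos (by simpa using h), List.foldl_cons]
      exact ih _
    · rw [if_neg h, if_neg (by simpa using h)]
      exact ih acc

-- ---- pass 1 of B, characterised ----
theorem scanReps_eq (board : List String) (d : PySem.Dict (Int × Int) (Int × Int))
    (x y : Int) :
    pvScanRepsB board d x y
      = PySem.Set.ofList ((([((x : Int) - 1, (y : Int)), (x, y - 1)].filter
          (fun p => decide (0 ≤ p.1 ∧ 0 ≤ p.2 ∧ pvCellA board p.2 p.1 = '0'))).map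
          (fun p => d.getD p (0, 0))) ) := by
  unfold pvScanRepsB
  rw [show (fun (reps : List (Int × Int)) (p : Int × Int) =>
      if 0 ≤ p.1 ∧ 0 ≤ p.2 ∧ pvCellA board p.2 p.1 = '0' then
        let r := d.getD p (0, 0)
        if reps.contains r then reps else reps ++ [r]
      else reps)
    = (fun (reps : List (Int × Int)) (p : Int × Int) =>
        if 0 ≤ p.1 ∧ 0 ≤ p.2 ∧ pvCellA board p.2 p.1 = '0'
        then PySem.Set.add reps (d.getD p (0, 0)) else reps) from rfl]
  rw [foldl_cond_filter]
  rw [← PySem.Set.update_map_eq_foldl_add, PySem.Set.update_nil_left]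

theorem mem_candQ {n m : Int} {board : List String} {x y : Int}
    (hx0 : 0 ≤ x) (hxm : x < m) (hy0 : 0 ≤ y) (hyn : y < n) {q : Int × Int} :
    q ∈ ([((x : Int) - 1, (y : Int)), (x, y - 1)].filter
        (fun p => decide (0 ≤ p.1 ∧ 0 ≤ p.2 ∧ pvCellA board p.2 p.1 = '0')))
      ↔ POpen n m board q ∧ (q = (x - 1, y) ∨ q = (x, y - 1)) := by
  rw [List.mem_filter]
  simp only [List.mem_cons, List.not_mem_nil, or_false, decide_eq_true_eq]
  constructor
  · rintro ⟨(rfl | rfl), h1, h2, h3⟩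
    · exact ⟨⟨h1, by dsimp; omega, h2, by dsimp; omega, h3⟩, Or.inl rfl⟩
    · exact ⟨⟨h1, by dsimp; omega, h2, by dsimp; omega, h3⟩, Or.inr rfl⟩
  · rintro ⟨⟨h1, h2, h3, h4, h5⟩, (rfl | rfl)⟩
    · exact ⟨Or.inl rfl, h1, h3, h5⟩
    · exact ⟨Or.inr rfl, h1, h3, h5⟩

theorem not_self_mem_nbrsB {n m : Int} {board : List String} (c : Int × Int) :
    c ∉ pvOpenNbrsB n m board c.1 c.2 := by
  intro h
  rcases (mem_nbrsB.mp h).2 with h2 | h2 | h2 | h2 <;>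
    · rw [Prod.ext_iff] at h2; dsimp at h2; omega

def InvC (n m : Int) (board : List String) (scanned : List (Int × Int))
    (d : PySem.Dict (Int × Int) (Int × Int)) : Prop :=
  d.keys.Nodup ∧
  (∀ p, d.contains p = true ↔ (POpen n m board p ∧ p ∈ scanned)) ∧
  (∀ p, d.contains p = true → d.contains (d.getD p (0, 0)) = true) ∧
  (∀ p q, d.contains p = true → d.contains q = true →
    d.getD p (0, 0) = d.getD q (0, 0) → PReach n m board p q) ∧
  (∀ p q, d.contains p = true → d.contains q = true →
    q ∈ pvOpenNbrsB n m board p.1 p.2 → d.getD p (0, 0) = d.getD q (0, 0))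

theorem stepC_inv {n m : Int} {board : List String} {scanned t : List (Int × Int)}
    {d : PySem.Dict (Int × Int) (Int × Int)} {c : Int × Int}
    (hsplit : pvScanL n m = scanned ++ c :: t)
    (hinv : InvC n m board scanned d) :
    InvC n m board (scanned ++ [c]) (pvStepC board d c) := by
  obtain ⟨hN, hK, hV, hE1, hE2⟩ := hinv
  have hcmem : c ∈ pvScanL n m := by
    rw [hsplit]; exact List.mem_append.mpr (Or.inr List.mem_cons_self)
  obtain ⟨hcx0, hcxm, hcy0, hcyn⟩ := mem_scanL.mp hcmem
  have hscan : ∀ p, p ∈ scanned ↔ (p ∈ pvScanL n m ∧ pvLexYX p c) := mem_split_scanL hsplit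
  have hcns : c ∉ scanned := fun h => lexyx_irrefl c ((hscan c).mp h).2
  unfold pvStepC
  by_cases hcell : pvCellA board c.2 c.1 = '0'
  case neg =>
    rw [if_pos hcell]
    have hnotopen : ¬ POpen n m board c := fun hop => hcell hop.2.2.2.2
    refine ⟨hN, ?_, hV, hE1, hE2⟩
    intro p
    rw [hK p]
    constructor
    · rintro ⟨hop, hmem⟩
      exact ⟨hop, List.mem_append.mpr (Or.inl hmem)⟩
    · rintro ⟨hop, hmem⟩
      rcases List.mem_append.mp hmem with hmem | hmem
      · exact ⟨hop, hmem⟩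
      · rw [List.mem_singleton] at hmem; subst hmem
        exact absurd hop hnotopen
  case pos =>
    rw [if_neg (fun h => h hcell)]
    have hopc : POpen n m board c := ⟨hcx0, hcxm, hcy0, hcyn, hcell⟩
    have hnotC : d.contains c = false := by
      by_cases h : d.contains c = true
      · exact absurd ((hK c).mp h).2 hcns
      · simpa using h
    -- the candidate list and the reps list
    set Q := ([ (c.1 - 1, c.2), (c.1, c.2 - 1) ] :
        List (Int × Int)).filter
        (fun p => decide (0 ≤ p.1 ∧ 0 ≤ p.2 ∧ pvCellA board p.2 p.1 = '0')) with hQdef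
    have hreps : pvScanRepsB board d c.1 c.2
        = PySem.Set.ofList (Q.map (fun p => d.getD p (0, 0))) := scanReps_eq board d c.1 c.2
    have hQmem : ∀ q, q ∈ Q ↔ POpen n m board q ∧ (q = (c.1 - 1, c.2) ∨ q = (c.1, c.2 - 1)) :=
      fun q => mem_candQ hcx0 hcxm hcy0 hcyn
    have hQscan : ∀ q ∈ Q, q ∈ scanned := by
      intro q hq
      obtain ⟨hop, hsh⟩ := (hQmem q).mp hq
      apply (hscan q).mpr
      refine ⟨mem_scanL.mpr ⟨hop.1, hop.2.1, hop.2.2.1, hop.2.2.2.1⟩, ?_⟩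
      rcases hsh with rfl | rfl
      · exact Or.inr ⟨rfl, by omega⟩
      · exact Or.inl (by dsimp; omega)
    have hQkey : ∀ q ∈ Q, d.contains q = true := by
      intro q hq
      exact (hK q).mpr ⟨((hQmem q).mp hq).1, hQscan q hq⟩
    have hQnbr : ∀ q ∈ Q, q ∈ pvOpenNbrsB n m board c.1 c.2 := by
      intro q hq
      obtain ⟨hop, hsh⟩ := (hQmem q).mp hq
      apply mem_nbrsB.mpr
      refine ⟨hop, ?_⟩
      rcases hsh with rfl | rfl
      · exact Or.inl rfl
      · exact Or.inr (Or.inr (Or.inr rfl))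
    have hNbrQ : ∀ q, q ∈ pvOpenNbrsB n m board c.1 c.2 → d.contains q = true → q ∈ Q := by
      intro q hnb hcq
      obtain ⟨hop, hsh⟩ := mem_nbrsB.mp hnb
      have hlex : pvLexYX q c := ((hscan q).mp ((hK q).mp hcq).2).2
      apply (hQmem q).mpr
      refine ⟨hop, ?_⟩
      rcases hsh with rfl | rfl | rfl | rfl
      · exact Or.inl rfl
      · exact absurd hlex (by unfold pvLexYX; dsimp; omega)
      · exact absurd hlex (by unfold pvLexYX; dsimp; omega)
      · exact Or.inr rfl
    have hfresh : ∀ q, d.contains q = true → d.getD q (0, 0) ≠ c := by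
      intro q hq hc
      have := hV q hq
      rw [hc, hnotC] at this
      exact absurd this (by simp)
    cases hrepscase : pvScanRepsB board d c.1 c.2 with
    | nil =>
      show InvC n m board (scanned ++ [c]) (d.insert c c)
      have hQempty : ∀ q, q ∉ Q := by
        intro q hq
        have hmem2 : d.getD q (0, 0) ∈ pvScanRepsB board d c.1 c.2 := by
          rw [hreps]
          exact (PySem.Set.mem_ofList _ _).mpr (List.mem_map.mpr ⟨q, hq, rfl⟩)
        rw [hrepscase] at hmem2
        exact absurd hmem2 List.not_mem_nil
      have hcont' : ∀ p, (d.insert c c).contains p = true ↔ p = c ∨ d.contains p = true := by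
        intro p
        rw [PySem.Dict.contains_insert]
        simp
      have hget' : ∀ p, (d.insert c c).getD p (0, 0) = if p = c then c else d.getD p (0, 0) :=
        fun p => PySem.Dict.getD_insert d c p c (0, 0)
      have hnec : ∀ p, d.contains p = true → p ≠ c := by
        intro p hp h
        rw [h, hnotC] at hp
        exact absurd hp (by simp)
      refine ⟨?_, ?_, ?_, ?_, ?_⟩
      · rw [PySem.Dict.keys_insert_of_not_contains d c hnotC]
        apply List.Nodup.append hN (List.nodup_singleton c)
        intro a ha hb
        rw [List.mem_singleton] at hb; subst hb
        rw [← PySem.Dict.contains_iff_mem_keys] at ha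
        rw [ha] at hnotC
        exact absurd hnotC (by simp)
      · intro p
        rw [hcont' p, hK p]
        constructor
        · rintro (hpc | ⟨hop, hmem⟩)
          · subst hpc
            exact ⟨hopc, List.mem_append.mpr (Or.inr List.mem_cons_self)⟩
          · exact ⟨hop, List.mem_append.mpr (Or.inl hmem)⟩
        · rintro ⟨hop, hmem⟩
          rcases List.mem_append.mp hmem with hmem | hmem
          · exact Or.inr ⟨hop, hmem⟩
          · rw [List.mem_singleton] at hmem; exact Or.inl hmem
      · intro p hp
        rcases (hcont' p).mp hp with hpc | hp'
        · subst hpc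
          rw [hget' p, if_pos rfl]
          exact (hcont' p).mpr (Or.inl rfl)
        · rw [hget' p, if_neg (hnec p hp')]
          exact (hcont' _).mpr (Or.inr (hV p hp'))
      · intro p q hp hq heq
        rw [hget' p, hget' q] at heq
        rcases (hcont' p).mp hp with hpc | hp' <;> rcases (hcont' q).mp hq with hqc | hq'
        · subst hpc; subst hqc; exact Relation.ReflTransGen.refl
        · subst hpc
          rw [if_pos rfl, if_neg (hnec q hq')] at heq
          exact absurd heq.symm (hfresh q hq')
        · subst hqc
          rw [if_neg (hnec p hp'), if_pos rfl] at heq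
          exact absurd heq (hfresh p hp')
        · rw [if_neg (hnec p hp'), if_neg (hnec q hq')] at heq
          exact hE1 p q hp' hq' heq
      · intro p q hp hq hnb
        rcases (hcont' p).mp hp with hpc | hp' <;> rcases (hcont' q).mp hq with hqc | hq'
        · subst hpc; subst hqc; rfl
        · subst hpc
          exact absurd (hNbrQ q hnb hq') (hQempty q)
        · subst hqc
          have hpop : POpen n m board p := ((hK p).mp hp').1
          have : p ∈ pvOpenNbrsB n m board q.1 q.2 := nbr_symm hpop hnb
          exact absurd (hNbrQ p this hp') (hQempty p)
        · rw [hget' p, hget' q, if_neg (hnec p hp'), if_neg (hnec q hq')]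
          exact hE2 p q hp' hq' hnb
    | cons keep rest =>
      show InvC n m board (scanned ++ [c])
        (rest.foldl (fun d r => pvRelabelB keep r d) (d.insert c keep))
      have hrepsnd : (keep :: rest).Nodup := by
        rw [← hrepscase, hreps]; exact PySem.Set.nodup_ofList _
      have hkeeprest : keep ∉ rest := (List.nodup_cons.mp hrepsnd).1
      have hrmem : ∀ r, r ∈ keep :: rest ↔ ∃ q ∈ Q, d.getD q (0, 0) = r := by
        intro r
        rw [← hrepscase, hreps]
        rw [PySem.Set.mem_ofList]
        simp [List.mem_map]
      obtain ⟨a0, ha0Q, ha0⟩ := (hrmem keep).mp List.mem_cons_self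
      have hnec : ∀ p, d.contains p = true → p ≠ c := by
        intro p hp h
        rw [h, hnotC] at hp
        exact absurd hp (by simp)
      have hcont1 : ∀ p, (d.insert c keep).contains p = true ↔ p = c ∨ d.contains p = true := by
        intro p
        rw [PySem.Dict.contains_insert]
        simp
      have hget1 : ∀ p, (d.insert c keep).getD p (0, 0)
          = if p = c then keep else d.getD p (0, 0) :=
        fun p => PySem.Dict.getD_insert d c p keep (0, 0)
      have hnd1' : (d.insert c keep).keys.Nodup := by
        rw [PySem.Dict.keys_insert_of_not_contains d keep hnotC]
        apply List.Nodup.append hN (List.nodup_singleton c)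
        intro a ha hb
        rw [List.mem_singleton] at hb; subst hb
        rw [← PySem.Dict.contains_iff_mem_keys] at ha
        rw [ha] at hnotC
        exact absurd hnotC (by simp)
      obtain ⟨hkeys', hget'0⟩ := relabelFold keep rest (d.insert c keep) hnd1' hkeeprest
      set d' := rest.foldl (fun d r => pvRelabelB keep r d) (d.insert c keep) with hd'def
      have hcont' : ∀ p, d'.contains p = true ↔ p = c ∨ d.contains p = true := by
        intro p
        rw [PySem.Dict.contains_iff_mem_keys, hkeys', ← PySem.Dict.contains_iff_mem_keys]
        exact hcont1 p
      have hget' : ∀ p, d'.contains p = true →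
          d'.getD p (0, 0) = (if (if p = c then keep else d.getD p (0, 0)) ∈ keep :: rest
            then keep else (if p = c then keep else d.getD p (0, 0))) := by
        intro p hp
        have hp1 : (d.insert c keep).contains p = true := (hcont1 p).mpr ((hcont' p).mp hp)
        have hv1 : (d.insert c keep).get? p
            = some ((d.insert c keep).getD p (0, 0)) := contains_get?_getD _ p (0, 0) hp1
        have h2 := hget'0 p _ hv1
        rw [PySem.Dict.getD_eq_get?_getD, h2, Option.getD_some, hget1 p]
        by_cases hpc : p = c
        · simp only [if_pos hpc]
          rw [if_neg hkeeprest, if_pos List.mem_cons_self]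
        · simp only [if_neg hpc]
          by_cases hk : d.getD p (0, 0) = keep
          · rw [hk, if_neg hkeeprest, if_pos List.mem_cons_self]
          · by_cases hmem : d.getD p (0, 0) ∈ rest
            · rw [if_pos hmem, if_pos (List.mem_cons_of_mem _ hmem)]
            · rw [if_neg hmem, if_neg (by simp [hk, hmem])]
      have hreach_c : ∀ p, d.contains p = true → d.getD p (0, 0) ∈ keep :: rest →
          PReach n m board p c := by
        intro p hp hmem
        obtain ⟨a, haQ, ha⟩ := (hrmem _).mp hmem
        have hra : PReach n m board p a := hE1 p a hp (hQkey a haQ) (by rw [ha])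
        have hopa : POpen n m board a := ((hQmem a).mp haQ).1
        exact hra.tail ⟨hopa, nbr_symm hopc (hQnbr a haQ)⟩
      have hcontc : d'.contains c = true := (hcont' c).mpr (Or.inl rfl)
      have hbranch_c : d'.getD c (0, 0) = keep := by
        rw [hget' c hcontc, if_pos rfl, if_pos List.mem_cons_self]
      have hbranch_keep : ∀ p, d'.contains p = true → d'.getD p (0, 0) = keep →
          PReach n m board p c := by
        intro p hp hk
        rcases (hcont' p).mp hp with hpc | hp'
        · subst hpc; exact Relation.ReflTransGen.refl
        · rw [hget' p hp, if_neg (hnec p hp')] at hk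
          by_cases hmem : d.getD p (0, 0) ∈ keep :: rest
          · exact hreach_c p hp' hmem
          · rw [if_neg hmem] at hk
            exact hreach_c p hp' (by rw [hk]; exact List.mem_cons_self)
      have hvalkey : ∀ p, d'.contains p = true → d'.contains (d'.getD p (0, 0)) = true := by
        intro p hp
        have hkeepkey : d'.contains keep = true := by
          rw [← ha0]
          exact (hcont' _).mpr (Or.inr (hV a0 (hQkey a0 ha0Q)))
        rw [hget' p hp]
        by_cases hmem : (if p = c then keep else d.getD p (0, 0)) ∈ keep :: rest
        · rw [if_pos hmem]; exact hkeepkey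
        · rw [if_neg hmem]
          rcases (hcont' p).mp hp with hpc | hp'
          · rw [if_pos hpc]; exact hkeepkey
          · rw [if_neg (hnec p hp')]
            exact (hcont' _).mpr (Or.inr (hV p hp'))
      refine ⟨by rw [hkeys']; exact hnd1', ?_, hvalkey, ?_, ?_⟩
      · intro p
        rw [hcont' p, hK p]
        constructor
        · rintro (hpc | ⟨hop, hmem⟩)
          · subst hpc
            exact ⟨hopc, List.mem_append.mpr (Or.inr List.mem_cons_self)⟩
          · exact ⟨hop, List.mem_append.mpr (Or.inl hmem)⟩
        · rintro ⟨hop, hmem⟩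
          rcases List.mem_append.mp hmem with hmem | hmem
          · exact Or.inr ⟨hop, hmem⟩
          · rw [List.mem_singleton] at hmem; exact Or.inl hmem
      · intro p q hp hq heq
        by_cases hpk : d'.getD p (0, 0) = keep
        · have hqk : d'.getD q (0, 0) = keep := by rw [← heq, hpk]
          exact reach_trans (hbranch_keep p hp hpk) (reach_symm (hbranch_keep q hq hqk))
        · have hqk : ¬ d'.getD q (0, 0) = keep := fun h => hpk (by rw [heq, h])
          have hpc : p ≠ c := fun h => by subst h; exact hpk hbranch_c
          have hqc : q ≠ c := fun h => by subst h; exact hqk hbranch_c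
          have hp' : d.contains p = true := ((hcont' p).mp hp).resolve_left hpc
          have hq' : d.contains q = true := ((hcont' q).mp hq).resolve_left hqc
          have hpv : d'.getD p (0, 0) = d.getD p (0, 0) := by
            have hg := hget' p hp
            rw [if_neg hpc] at hg
            by_cases hmem : d.getD p (0, 0) ∈ keep :: rest
            · rw [if_pos hmem] at hg; exact absurd hg hpk
            · rw [if_neg hmem] at hg; exact hg
          have hqv : d'.getD q (0, 0) = d.getD q (0, 0) := by
            have hg := hget' q hq
            rw [if_neg hqc] at hg
            by_cases hmem : d.getD q (0, 0) ∈ keep :: rest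
            · rw [if_pos hmem] at hg; exact absurd hg hqk
            · rw [if_neg hmem] at hg; exact hg
          rw [hpv, hqv] at heq
          exact hE1 p q hp' hq' heq
      · intro p q hp hq hnb
        rcases (hcont' p).mp hp with hpc | hp'
        · subst hpc
          rcases (hcont' q).mp hq with hqc | hq'
          · subst hqc
            exact absurd hnb (not_self_mem_nbrsB _)
          · have hqQ : q ∈ Q := hNbrQ q hnb hq'
            rw [hbranch_c, hget' q hq, if_neg (hnec q hq'),
              if_pos ((hrmem _).mpr ⟨q, hqQ, rfl⟩)]
        · rcases (hcont' q).mp hq with hqc | hq'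
          · subst hqc
            have hpop : POpen n m board p := ((hK p).mp hp').1
            have hpQ : p ∈ Q := hNbrQ p (nbr_symm hpop hnb) hp'
            rw [hbranch_c, hget' p hp, if_neg (hnec p hp'),
              if_pos ((hrmem _).mpr ⟨p, hpQ, rfl⟩)]
          · have hpq := hE2 p q hp' hq' hnb
            rw [hget' p hp, hget' q hq, if_neg (hnec p hp'), if_neg (hnec q hq'), hpq]

theorem foldC_inv {n m : Int} {board : List String} :
    ∀ (t s : List (Int × Int)) (d : PySem.Dict (Int × Int) (Int × Int)),
    pvScanL n m = s ++ t → InvC n m board s d →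
    InvC n m board (s ++ t) (t.foldl (pvStepC board) d) := by
  intro t
  induction t with
  | nil => intro s d _ h; simpa using h
  | cons c t ih =>
    intro s d hsplit h
    rw [List.foldl_cons]
    have h2 := stepC_inv hsplit h
    have h3 := ih (s ++ [c]) (pvStepC board d c) (by rw [hsplit]; simp) h2
    simpa [List.append_assoc] using h3

theorem compC_eq (n m : Int) (board : List String) :
    pvCompC n m board = (pvScanL n m).foldl (pvStepC board) PySem.Dict.empty := by
  unfold pvCompC pvScanL
  rw [List.foldl_flatMap]
  congr 1
  funext d y
  rw [List.foldl_map]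

theorem compC_final (n m : Int) (board : List String) :
    InvC n m board (pvScanL n m) (pvCompC n m board) := by
  rw [compC_eq]
  have hbase : InvC n m board [] PySem.Dict.empty := by
    refine ⟨PySem.Dict.nodup_keys_empty, ?_, ?_, ?_, ?_⟩
    · intro p; simp [PySem.Dict.contains_empty]
    · intro p hp; simp [PySem.Dict.contains_empty] at hp
    · intro p q hp _ _; simp [PySem.Dict.contains_empty] at hp
    · intro p q hp _ _; simp [PySem.Dict.contains_empty] at hp
  have h := foldC_inv (n := n) (m := m) (board := board)
    (pvScanL n m) [] PySem.Dict.empty (by simp) hbase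
  simpa using h

-- final facts about B's first pass
def pvGF (n m : Int) (board : List String) (p : Int × Int) : Int × Int :=
  (pvCompC n m board).getD p (0, 0)

def pvSzC (n m : Int) (board : List String) (r : Int × Int) : Int :=
  (pvSizeC (pvCompC n m board)).getD r 0

theorem containsC_iff {n m : Int} {board : List String} {p : Int × Int} :
    (pvCompC n m board).contains p = true ↔ POpen n m board p := by
  rw [(compC_final n m board).2.1 p]
  constructor
  · exact And.left
  · intro h
    exact ⟨h, mem_scanL.mpr ⟨h.1, h.2.1, h.2.2.1, h.2.2.2.1⟩⟩

theorem gF_congr_reach {n m : Int} {board : List String} {p : Int × Int}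
    (hp : POpen n m board p) :
    ∀ q, PReach n m board p q → pvGF n m board p = pvGF n m board q := by
  intro q h
  induction h with
  | refl => rfl
  | tail hr hadj ih =>
    rw [ih]
    exact (compC_final n m board).2.2.2.2 _ _ (containsC_iff.mpr hadj.1)
      (containsC_iff.mpr (open_of_mem_nbrsB hadj.2)) hadj.2

theorem gF_eq_iff {n m : Int} {board : List String} {p q : Int × Int}
    (hp : POpen n m board p) (hq : POpen n m board q) :
    pvGF n m board p = pvGF n m board q ↔ PReach n m board p q := by
  constructor
  · intro h
    exact (compC_final n m board).2.2.2.1 p q (containsC_iff.mpr hp)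
      (containsC_iff.mpr hq) h
  · exact gF_congr_reach hp q

theorem szC_eq {n m : Int} {board : List String} {p : Int × Int}
    (hp : POpen n m board p) :
    pvSzC n m board (pvGF n m board p) = ((pvCompA n m board p).length : Int) := by
  have hnd : (pvCompC n m board).keys.Nodup := (compC_final n m board).1
  unfold pvSzC pvSizeC
  rw [PySem.Dict.getD_foldl_insert_add_one, PySem.Dict.getD_empty]
  have hvals : (pvCompC n m board).values
      = (pvCompC n m board).items.map Prod.snd := rfl
  have hcount : List.count (pvGF n m board p) (pvCompC n m board).values
      = (((pvCompC n m board).items.filter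
          (fun kv => kv.2 == pvGF n m board p)).map Prod.fst).length := by
    rw [hvals, List.count_eq_countP, List.countP_map, List.length_map,
      List.countP_eq_length_filter]
    rfl
  have hkeys : (pvCompC n m board).keys = (pvCompC n m board).items.map Prod.fst := rfl
  have hndK : (((pvCompC n m board).items.filter
      (fun kv => kv.2 == pvGF n m board p)).map Prod.fst).Nodup := by
    apply List.Nodup.sublist (List.Sublist.map Prod.fst List.filter_sublist)
    rw [← hkeys]; exact hnd
  have hmemK : ∀ q, q ∈ ((pvCompC n m board).items.filter
      (fun kv => kv.2 == pvGF n m board p)).map Prod.fst ↔ q ∈ pvCompA n m board p := by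
    intro q
    rw [List.mem_map]
    constructor
    · rintro ⟨kv, hkv, rfl⟩
      rw [List.mem_filter] at hkv
      obtain ⟨hitems, hval⟩ := hkv
      rw [beq_iff_eq] at hval
      have hget : (pvCompC n m board).get? kv.1 = some (pvGF n m board p) := by
        rw [← hval]
        exact PySem.Dict.get?_of_mem_items _ (by rw [hval, ← hval]; exact hitems) hnd
      have hcq : (pvCompC n m board).contains kv.1 = true := by
        rw [PySem.Dict.contains_eq_isSome_get?, hget]; rfl
      have hopq : POpen n m board kv.1 := containsC_iff.mp hcq
      have hgv : pvGF n m board kv.1 = pvGF n m board p := by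
        unfold pvGF
        rw [PySem.Dict.getD_eq_get?_getD, hget]
        rfl
      exact ((compA_spec hp).2 kv.1).mpr (reach_symm ((gF_eq_iff hopq hp).mp hgv))
    · intro hq
      have hrq : PReach n m board p q := ((compA_spec hp).2 q).mp hq
      have hopq : POpen n m board q := reach_open hp hrq
      have hgv : pvGF n m board q = pvGF n m board p :=
        (gF_eq_iff hopq hp).mpr (reach_symm hrq)
      have hcq : (pvCompC n m board).contains q = true := containsC_iff.mpr hopq
      refine ⟨(q, pvGF n m board q), ?_, rfl⟩
      rw [List.mem_filter]
      refine ⟨?_, by rw [beq_iff_eq]; exact hgv⟩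
      apply PySem.Dict.mem_items_of_get?_eq_some
      exact contains_get?_getD _ q (0, 0) hcq
  have hlen : (((pvCompC n m board).items.filter
      (fun kv => kv.2 == pvGF n m board p)).map Prod.fst).length
      = (pvCompA n m board p).length := by
    apply List.Perm.length_eq
    rw [List.perm_ext_iff_of_nodup hndK (compA_spec hp).1]
    exact hmemK
  rw [hcount, hlen]
  omega

-- ---- pass 2: per-cell values ----
def pvDigitsA (n m : Int) (board : List String) (x y : Int) : List Char :=
  if pvCellA board y x = '0' then ['0']
  else
    let ng : PySem.Set Int := (pvNearA n m (x, y)).foldl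
      (fun s p => PySem.Set.add s (pvGbF n m board p)) PySem.Set.empty
    let sumval := (ng.filter (fun g => g != 0)).foldl
      (fun sv g => PySem.Int.mod (pvGcF n m board g + sv) 10) 1
    (PySem.Int.toStr (PySem.Int.mod sumval 10)).toList

def pvStrB (n m : Int) (board : List String) (x y : Int) : String :=
  if pvCellA board y x = '0' then "0"
  else
    let near := [((-1 : Int), (0 : Int)), (1, 0), (0, 1), (0, -1)].foldl
      (fun near dxy =>
        let ax := x + dxy.1
        let ay := y + dxy.2
        if 0 ≤ ax ∧ ax < m ∧ 0 ≤ ay ∧ ay < n ∧ pvCellA board ay ax = '0' then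
          let r := (pvCompC n m board).getD (ax, ay) (0, 0)
          if near.contains r then near else near ++ [r]
        else near) []
    PySem.Int.toStr (PySem.Int.mod
      (1 + (near.map (fun r => (pvSizeC (pvCompC n m board)).getD r 0)).sum) 10)

theorem ite_append_branches {α : Type} (c : Prop) [Decidable c] (a u v : List α) :
    (if c then a ++ u else a ++ v) = a ++ (if c then u else v) := by
  split_ifs <;> rfl

theorem solve_eq_map (n m : Int) (board : List String) :
    solve n m board = (PySem.List.pyRange 0 n 1).map (fun y =>
      String.ofList ((PySem.List.pyRange 0 m 1).flatMap (fun x => pvDigitsA n m board x y))) := by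
  unfold solve
  have houter : ∀ y : Int,
      (PySem.List.pyRange 0 m 1).foldl (fun line x =>
        if pvCellA board y x = '0' then line ++ ['0']
        else
          let ng : PySem.Set Int := (pvNearA n m (x, y)).foldl
            (fun s p => PySem.Set.add s ((pvFirstA n m board).2.2.getD p 0)) PySem.Set.empty
          let sumval := (ng.filter (fun g => g != 0)).foldl
            (fun sv g => PySem.Int.mod ((pvFirstA n m board).1.getD g 0 + sv) 10) 1
          line ++ (PySem.Int.toStr (PySem.Int.mod sumval 10)).toList) []
      = (PySem.List.pyRange 0 m 1).flatMap (fun x => pvDigitsA n m board x y) := by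
    intro y
    have hfun : (fun (line : List Char) (x : Int) =>
        if pvCellA board y x = '0' then line ++ ['0']
        else
          let ng : PySem.Set Int := (pvNearA n m (x, y)).foldl
            (fun s p => PySem.Set.add s ((pvFirstA n m board).2.2.getD p 0)) PySem.Set.empty
          let sumval := (ng.filter (fun g => g != 0)).foldl
            (fun sv g => PySem.Int.mod ((pvFirstA n m board).1.getD g 0 + sv) 10) 1
          line ++ (PySem.Int.toStr (PySem.Int.mod sumval 10)).toList)
        = fun line x => line ++ pvDigitsA n m board x y := by
      funext line x
      unfold pvDigitsA
      rw [← ite_append_branches]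
      rfl
    rw [hfun, PySem.List.foldl_append_eq_flatMap]
    rfl
  calc (PySem.List.pyRange 0 n 1).foldl _ []
      = (PySem.List.pyRange 0 n 1).foldl (fun answer y => answer ++
          [String.ofList ((PySem.List.pyRange 0 m 1).flatMap (fun x => pvDigitsA n m board x y))]) [] := by
        apply List.foldl_ext
        intro acc y _
        dsimp only
        rw [houter y]
    _ = _ := by
        rw [PySem.List.foldl_append_singleton_eq_map, List.nil_append]

theorem solve_alt_eq_map (n m : Int) (board : List String) :
    solve_alt n m board = (PySem.List.pyRange 0 n 1).map (fun y =>
      PySem.Str.join "" ((PySem.List.pyRange 0 m 1).map (fun x => pvStrB n m board x y))) := by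
  unfold solve_alt
  have houter : ∀ y : Int,
      (PySem.List.pyRange 0 m 1).foldl (fun row x =>
        if pvCellA board y x = '0' then row ++ ["0"]
        else
          let near := [((-1 : Int), (0 : Int)), (1, 0), (0, 1), (0, -1)].foldl
            (fun near dxy =>
              let ax := x + dxy.1
              let ay := y + dxy.2
              if 0 ≤ ax ∧ ax < m ∧ 0 ≤ ay ∧ ay < n ∧ pvCellA board ay ax = '0' then
                let r := (pvCompC n m board).getD (ax, ay) (0, 0)
                if near.contains r then near else near ++ [r]
              else near) []
          row ++ [PySem.Int.toStr (PySem.Int.mod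
            (1 + (near.map (fun r => (pvSizeC (pvCompC n m board)).getD r 0)).sum) 10)]) []
      = (PySem.List.pyRange 0 m 1).map (fun x => pvStrB n m board x y) := by
    intro y
    have hfun : (fun (row : List String) (x : Int) =>
        if pvCellA board y x = '0' then row ++ ["0"]
        else
          let near := [((-1 : Int), (0 : Int)), (1, 0), (0, 1), (0, -1)].foldl
            (fun near dxy =>
              let ax := x + dxy.1
              let ay := y + dxy.2
              if 0 ≤ ax ∧ ax < m ∧ 0 ≤ ay ∧ ay < n ∧ pvCellA board ay ax = '0' then
                let r := (pvCompC n m board).getD (ax, ay) (0, 0)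
                if near.contains r then near else near ++ [r]
              else near) []
          row ++ [PySem.Int.toStr (PySem.Int.mod
            (1 + (near.map (fun r => (pvSizeC (pvCompC n m board)).getD r 0)).sum) 10)])
        = fun row x => row ++ [pvStrB n m board x y] := by
      funext row x
      by_cases hcell : pvCellA board y x = '0'
      · rw [if_pos hcell]
        have h2 : pvStrB n m board x y = "0" := by
          unfold pvStrB; rw [if_pos hcell]
        rw [h2]
      · rw [if_neg hcell]
        have h2 : pvStrB n m board x y
            = PySem.Int.toStr (PySem.Int.mod
              (1 + (([((-1 : Int), (0 : Int)), (1, 0), (0, 1), (0, -1)].foldl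
                (fun near dxy =>
                  let ax := x + dxy.1
                  let ay := y + dxy.2
                  if 0 ≤ ax ∧ ax < m ∧ 0 ≤ ay ∧ ay < n ∧ pvCellA board ay ax = '0' then
                    let r := (pvCompC n m board).getD (ax, ay) (0, 0)
                    if near.contains r then near else near ++ [r]
                  else near) []).map
                  (fun r => (pvSizeC (pvCompC n m board)).getD r 0)).sum) 10) := by
          unfold pvStrB; rw [if_neg hcell]
        rw [h2]
    rw [hfun, PySem.List.foldl_append_singleton_eq_map]
    rfl
  calc (PySem.List.pyRange 0 n 1).foldl _ []
      = (PySem.List.pyRange 0 n 1).foldl (fun answer y => answer ++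
          [PySem.Str.join "" ((PySem.List.pyRange 0 m 1).map (fun x => pvStrB n m board x y))]) [] := by
        apply List.foldl_ext
        intro acc y _
        dsimp only
        rw [houter y]
    _ = _ := by
        rw [PySem.List.foldl_append_singleton_eq_map, List.nil_append]

-- ---- set/list bookkeeping for pass 2 ----
theorem filter_ofList {α : Type} [DecidableEq α] (p : α → Bool) (l : List α) :
    (PySem.Set.ofList l).filter p = PySem.Set.ofList (l.filter p) := by
  induction l using List.reverseRecOn with
  | nil => rfl
  | append_singleton l a ih =>
    rw [PySem.Set.ofList_append_singleton, List.filter_append]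
    by_cases hp : p a = true
    · have hfa : List.filter p [a] = [a] := by simp [hp]
      rw [hfa, PySem.Set.ofList_append_singleton]
      by_cases hmem : a ∈ l
      · have hm1 : a ∈ PySem.Set.ofList l := (PySem.Set.mem_ofList _ _).mpr hmem
        have hm2 : a ∈ PySem.Set.ofList (l.filter p) :=
          (PySem.Set.mem_ofList _ _).mpr (List.mem_filter.mpr ⟨hmem, hp⟩)
        rw [PySem.Set.add_of_mem hm1, PySem.Set.add_of_mem hm2, ih]
      · have hm1 : a ∉ PySem.Set.ofList l := fun h => hmem ((PySem.Set.mem_ofList _ _).mp h)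
        have hm2 : a ∉ PySem.Set.ofList (l.filter p) := fun h =>
          hmem (List.mem_of_mem_filter ((PySem.Set.mem_ofList _ _).mp h))
        rw [PySem.Set.add_of_not_mem hm1, PySem.Set.add_of_not_mem hm2, List.filter_append, hfa, ih]
    · have hfa : List.filter p [a] = [] := by simp [hp]
      rw [hfa, List.append_nil]
      by_cases hmem : a ∈ l
      · have hm1 : a ∈ PySem.Set.ofList l := (PySem.Set.mem_ofList _ _).mpr hmem
        rw [PySem.Set.add_of_mem hm1, ih]
      · have hm1 : a ∉ PySem.Set.ofList l := fun h => hmem ((PySem.Set.mem_ofList _ _).mp h)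
        rw [PySem.Set.add_of_not_mem hm1, List.filter_append, hfa, List.append_nil, ih]

theorem mem_nearA_bounds {n m : Int} {x y : Int} {q : Int × Int}
    (h : q ∈ pvNearA n m (x, y)) : 0 ≤ q.1 ∧ q.1 < m ∧ 0 ≤ q.2 ∧ q.2 < n := by
  rw [nearA_explicit] at h
  simp only [List.mem_append, mem_ite_singleton, List.not_mem_nil, false_or, or_assoc] at h
  rcases h with ⟨h, rfl⟩ | ⟨h, rfl⟩ | ⟨h, rfl⟩ | ⟨h, rfl⟩ <;> dsimp <;> omega

theorem foldl_mod_chain (F : Int → Int) :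
    ∀ (L : List Int) (init : Int),
    PySem.Int.mod (L.foldl (fun sv g => PySem.Int.mod (F g + sv) 10) init) 10
      = PySem.Int.mod (init + (L.map F).sum) 10 := by
  intro L
  induction L with
  | nil => intro init; simp
  | cons a L ih =>
    intro init
    rw [List.foldl_cons, ih, List.map_cons, List.sum_cons]
    rw [PySem.Int.mod_eq_emod_of_pos (by norm_num), PySem.Int.mod_eq_emod_of_pos (by norm_num),
      PySem.Int.mod_eq_emod_of_pos (by norm_num)]
    omega

theorem fold_add_pair {β γ : Type} [BEq β] [LawfulBEq β] [BEq γ] [LawfulBEq γ]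
    (f : Int × Int → β) (g : Int × Int → γ) (ctx : List (Int × Int))
    (hker : ∀ a ∈ ctx, ∀ b ∈ ctx, (f a = f b ↔ g a = g b)) :
    ∀ (L : List (Int × Int)), (∀ a ∈ L, a ∈ ctx) →
    ∀ (rep : List (Int × Int)), (∀ r ∈ rep, r ∈ ctx) →
    ∃ rep' : List (Int × Int), (∀ r ∈ rep', r ∈ ctx) ∧
      (L.map f).foldl PySem.Set.add (rep.map f) = rep'.map f ∧
      (L.map g).foldl PySem.Set.add (rep.map g) = rep'.map g := by
  intro L
  induction L with
  | nil => intro _ rep hrep; exact ⟨rep, hrep, rfl, rfl⟩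
  | cons a L ih =>
    intro hL rep hrep
    have hactx : a ∈ ctx := hL a List.mem_cons_self
    rw [List.map_cons, List.map_cons, List.foldl_cons, List.foldl_cons]
    by_cases hmem : f a ∈ rep.map f
    · have hmem' : g a ∈ rep.map g := by
        obtain ⟨r, hr, hfr⟩ := List.mem_map.mp hmem
        exact List.mem_map.mpr ⟨r, hr, (hker r (hrep r hr) a hactx).mp hfr⟩
      rw [PySem.Set.add_of_mem hmem, PySem.Set.add_of_mem hmem']
      exact ih (fun a' ha' => hL a' (List.mem_cons_of_mem _ ha')) rep hrep
    · have hmem' : g a ∉ rep.map g := by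
        intro h
        obtain ⟨r, hr, hgr⟩ := List.mem_map.mp h
        exact hmem (List.mem_map.mpr ⟨r, hr, (hker r (hrep r hr) a hactx).mpr hgr⟩)
      rw [PySem.Set.add_of_not_mem hmem, PySem.Set.add_of_not_mem hmem']
      have h1 : rep.map f ++ [f a] = (rep ++ [a]).map f := by simp
      have h2 : rep.map g ++ [g a] = (rep ++ [a]).map g := by simp
      rw [h1, h2]
      apply ih (fun a' ha' => hL a' (List.mem_cons_of_mem _ ha'))
      intro r hr
      rcases List.mem_append.mp hr with hr | hr
      · exact hrep r hr
      · rw [List.mem_singleton] at hr; subst hr; exact hactx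

theorem sum_ofList_map_congr {β γ : Type} [BEq β] [LawfulBEq β] [BEq γ] [LawfulBEq γ]
    (f : Int × Int → β) (g : Int × Int → γ) (F : β → Int) (G : γ → Int)
    (L : List (Int × Int))
    (hker : ∀ a ∈ L, ∀ b ∈ L, (f a = f b ↔ g a = g b))
    (hval : ∀ a ∈ L, F (f a) = G (g a)) :
    ((PySem.Set.ofList (L.map f)).map F).sum = ((PySem.Set.ofList (L.map g)).map G).sum := by
  obtain ⟨rep', hrep', h1, h2⟩ :=
    fold_add_pair f g L hker L (fun a ha => ha) [] (by simp)
  rw [PySem.Set.ofList_eq_foldl, PySem.Set.ofList_eq_foldl]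
  have e1 : (List.foldl PySem.Set.add [] (L.map f)) = rep'.map f := by
    simpa using h1
  have e2 : (List.foldl PySem.Set.add [] (L.map g)) = rep'.map g := by
    simpa using h2
  rw [e1, e2, List.map_map, List.map_map]
  apply congrArg
  apply List.map_congr_left
  intro r hr
  exact hval r (hrep' r hr)

-- B's inline neighbour fold collects the distinct labels of the open neighbours
theorem nearFold_eq (n m : Int) (board : List String) (x y : Int) :
    ([((-1 : Int), (0 : Int)), (1, 0), (0, 1), (0, -1)]).foldl
      (fun near dxy =>
        let ax := x + dxy.1
        let ay := y + dxy.2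
        if 0 ≤ ax ∧ ax < m ∧ 0 ≤ ay ∧ ay < n ∧ pvCellA board ay ax = '0' then
          let r := (pvCompC n m board).getD (ax, ay) (0, 0)
          if near.contains r then near else near ++ [r]
        else near) []
    = PySem.Set.ofList ((pvOpenNbrsB n m board x y).map (pvGF n m board)) := by
  have hnb : pvOpenNbrsB n m board x y
      = (([((-1 : Int), (0 : Int)), (1, 0), (0, 1), (0, -1)]).filter
          (fun d => decide (0 ≤ x + d.1 ∧ x + d.1 < m ∧ 0 ≤ y + d.2 ∧ y + d.2 < n ∧
            pvCellA board (y + d.2) (x + d.1) = '0'))).map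
          (fun d => (x + d.1, y + d.2)) := by
    unfold pvOpenNbrsB
    rw [show (fun (out : List (Int × Int)) (d : Int × Int) =>
        let ax := x + d.1
        let ay := y + d.2
        if 0 ≤ ax ∧ ax < m ∧ 0 ≤ ay ∧ ay < n ∧ pvCellA board ay ax = '0'
        then out ++ [(ax, ay)] else out)
      = (fun (out : List (Int × Int)) (d : Int × Int) =>
        if 0 ≤ x + d.1 ∧ x + d.1 < m ∧ 0 ≤ y + d.2 ∧ y + d.2 < n ∧
            pvCellA board (y + d.2) (x + d.1) = '0'
        then out ++ [(x + d.1, y + d.2)] else out) from rfl]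
    rw [foldl_cond_filter, PySem.List.foldl_append_singleton_eq_map, List.nil_append]
  rw [show (fun (near : List (Int × Int)) (dxy : Int × Int) =>
      let ax := x + dxy.1
      let ay := y + dxy.2
      if 0 ≤ ax ∧ ax < m ∧ 0 ≤ ay ∧ ay < n ∧ pvCellA board ay ax = '0' then
        let r := (pvCompC n m board).getD (ax, ay) (0, 0)
        if near.contains r then near else near ++ [r]
      else near)
    = (fun (near : List (Int × Int)) (dxy : Int × Int) =>
      if 0 ≤ x + dxy.1 ∧ x + dxy.1 < m ∧ 0 ≤ y + dxy.2 ∧ y + dxy.2 < n ∧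
          pvCellA board (y + dxy.2) (x + dxy.1) = '0'
      then PySem.Set.add near (pvGF n m board (x + dxy.1, y + dxy.2)) else near) from rfl]
  rw [foldl_cond_filter]
  rw [← PySem.Set.update_map_eq_foldl_add, PySem.Set.update_nil_left]
  rw [hnb, List.map_map]
  rfl

-- ---- the per-cell equality ----
theorem digits_eq {n m : Int} {board : List String} (hpre : Pre_solve n m board)
    {x y : Int} (hx0 : 0 ≤ x) (hxm : x < m) (hy0 : 0 ≤ y) (hyn : y < n) :
    pvDigitsA n m board x y = (pvStrB n m board x y).toList := by
  unfold pvDigitsA pvStrB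
  by_cases hcell : pvCellA board y x = '0'
  · rw [if_pos hcell, if_pos hcell]
    decide
  · rw [if_neg hcell, if_neg hcell]
    dsimp only
    have hng : (pvNearA n m (x, y)).foldl
        (fun s p => PySem.Set.add s (pvGbF n m board p)) PySem.Set.empty
        = PySem.Set.ofList ((pvNearA n m (x, y)).map (pvGbF n m board)) := by
      rw [← PySem.Set.update_map_eq_foldl_add, PySem.Set.update_empty]
    have hfl : ((pvNearA n m (x, y)).map (pvGbF n m board)).filter (fun g => g != 0)
        = ((pvOpenNbrsB n m board x y).map (pvGbF n m board)) := by
      rw [List.filter_map]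
      congr 1
      rw [nbrsB_eq_filter]
      apply List.filter_congr
      intro q hq
      have hb := mem_nearA_bounds hq
      by_cases hq0 : pvCellA board q.2 q.1 = '0'
      · have hop : POpen n m board q := ⟨hb.1, hb.2.1, hb.2.2.1, hb.2.2.2, hq0⟩
        have := gbF_ne_zero hpre hop
        simp [Function.comp, hq0, this]
      · have hop : ¬ POpen n m board q := fun h => hq0 h.2.2.2.2
        have := gbF_zero_of_not_open hpre hop
        simp [Function.comp, hq0, this]
    have hA : ((pvNearA n m (x, y)).foldl
          (fun s p => PySem.Set.add s (pvGbF n m board p)) PySem.Set.empty).filter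
            (fun g => g != 0)
        = PySem.Set.ofList ((pvOpenNbrsB n m board x y).map (pvGbF n m board)) := by
      rw [hng, filter_ofList, hfl]
    rw [hA, nearFold_eq n m board x y]
    have hsum : ((PySem.Set.ofList ((pvOpenNbrsB n m board x y).map (pvGbF n m board))).map
          (pvGcF n m board)).sum
        = ((PySem.Set.ofList ((pvOpenNbrsB n m board x y).map (pvGF n m board))).map
          (pvSzC n m board)).sum := by
      apply sum_ofList_map_congr
      · intro a ha b hb
        have hopa := open_of_mem_nbrsB ha
        have hopb := open_of_mem_nbrsB hb
        rw [gbF_eq_iff hpre hopa hopb, gF_eq_iff hopa hopb]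
      · intro a ha
        have hopa := open_of_mem_nbrsB ha
        rw [gcF_gbF hpre hopa, szC_eq hopa]
    rw [foldl_mod_chain]
    rw [hsum]
    rfl

-- ---- assembling the answer lists ----
theorem join_empty_sep (css : List (List Char)) :
    PySem.Chars.join [] css = css.flatten := by
  show List.intercalate [] css = css.flatten
  induction css with
  | nil => rfl
  | cons c cs ih =>
    cases cs with
    | nil => simp [List.intercalate]
    | cons d ds =>
      simp [List.intercalate, List.intersperse] at ih ⊢
      simp [ih]

theorem line_eq {n m : Int} {board : List String} (hpre : Pre_solve n m board)
    {y : Int} (hy0 : 0 ≤ y) (hyn : y < n) :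
    String.ofList ((PySem.List.pyRange 0 m 1).flatMap (fun x => pvDigitsA n m board x y))
      = PySem.Str.join "" ((PySem.List.pyRange 0 m 1).map (fun x => pvStrB n m board x y)) := by
  apply String.toList_inj.mp
  rw [PySem.Str.toList_join]
  rw [show ("" : String).toList = [] from rfl]
  rw [join_empty_sep, List.map_map, List.flatMap_def]
  rw [String.toList_ofList]
  congr 1
  apply List.map_congr_left
  intro x hx
  have hb := PySem.List.mem_pyRange_one.mp hx
  exact digits_eq hpre hb.1 hb.2 hy0 hyn

theorem solve_eq_solve_alt {n m : Int} {board : List String} (hpre : Pre_solve n m board) :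
    solve n m board = solve_alt n m board := by
  rw [solve_eq_map, solve_alt_eq_map]
  apply List.map_congr_left
  intro y hy
  have hb := PySem.List.mem_pyRange_one.mp hy
  exact line_eq hpre hb.1 hb.2
-- ===== VERDICT (by name: the statement is the Claim_ definition above) =====
theorem solve_spec : Claim_equal_solve := by
  intro n m board _ hpre
  unfold Spec_solve
  exact solve_eq_solve_alt hpre
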